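-- pv_equiv track=rewrite | github.com/michaelkimm/Algorithm-problem-solving-thought-process-re-record | Python/BaekJun/Baek2468.py | getIslandCnt
-- ===== SOURCE A (Python) =====
-- from collections import deque
--
-- di = [0, 0, 1, -1]
--
-- dj = [1, -1, 0, 0]
--
-- def getIslandCnt(graph, N, waterLevel):
--     visited = [[False for _ in range(N)] for _ in range(N)]
--     totalCnt = 0
--     for i in range(N):
--         for j in range(N):
--             if visited[i][j]:
--                 continue
--             if graph[i][j] <= waterLevel:
--                 continue
--             totalCnt += 1
--             start = (i, j) # i, j
--             visited[i][j] = True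
--             q = deque([start])
--             while q:
--                 ci, cj = q.popleft()
--                 for idx in range(4):
--                     ni = ci + di[idx]
--                     nj = cj + dj[idx]
--                     if not (0 <= ni < N and 0 <= nj < N):
--                         continue
--                     if visited[ni][nj]:
--                         continue
--                     if graph[ni][nj] <= waterLevel:
--                         continue
--                     visited[ni][nj] = True
--                     q.append((ni, nj))
--     return totalCnt
-- ===== SOURCE B (Python) =====
-- def getIslandCnt(graph, N, waterLevel):
--     # Union-find over cell indices i*N+j (union by smaller root index),
--     # inspecting only right/down neighbours; islands = above-water cells
--     # that are their own root.
--     if N <= 0: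
--         return 0
--     parent = list(range(N * N))
--
--     def find(x):
--         while parent[x] != x:
--             x = parent[x]
--         return x
--
--     def union(a, b):
--         ra, rb = find(a), find(b)
--         if ra == rb:
--             return
--         if ra < rb:
--             parent[rb] = ra
--         else:
--             parent[ra] = rb
--
--     for i in range(N):
--         for j in range(N):
--             if graph[i][j] <= waterLevel:
--                 continue
--             if j + 1 < N and graph[i][j + 1] > waterLevel:
--                 union(i * N + j, i * N + j + 1)
--             if i + 1 < N and graph[i + 1][j] > waterLevel:
--                 union(i * N + j, (i + 1) * N + j)
--
--     total = 0
--     for i in range(N):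
--         for j in range(N):
--             if graph[i][j] > waterLevel and find(i * N + j) == i * N + j:
--                 total += 1
--     return total
-- ===== Notes on version B (the rewrite author's own statement) =====
-- stated objective: alternative
-- what changed: Replaces the per-seed BFS flood fill with a visited matrix and deque by a single-pass union-find over cell indices (union by smaller root, right/down edges only), counting islands as above-water cells that are their own root.
import Mathlib
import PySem

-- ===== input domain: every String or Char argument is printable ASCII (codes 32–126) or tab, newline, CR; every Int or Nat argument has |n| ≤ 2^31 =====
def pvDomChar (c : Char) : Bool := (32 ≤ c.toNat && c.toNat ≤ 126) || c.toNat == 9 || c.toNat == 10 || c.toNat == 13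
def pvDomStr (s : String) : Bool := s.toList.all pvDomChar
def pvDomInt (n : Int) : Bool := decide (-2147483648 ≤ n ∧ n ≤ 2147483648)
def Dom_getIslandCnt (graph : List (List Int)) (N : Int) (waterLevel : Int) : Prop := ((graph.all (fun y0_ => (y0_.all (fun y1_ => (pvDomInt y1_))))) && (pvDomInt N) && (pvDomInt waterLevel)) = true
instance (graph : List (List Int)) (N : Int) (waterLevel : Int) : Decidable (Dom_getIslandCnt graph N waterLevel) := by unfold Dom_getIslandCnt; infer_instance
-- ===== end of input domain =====

-- B replaces A's per-seed BFS flood fill by a single-pass union-find over cell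
-- indices (union by smaller root, right/down edges only); same return value,
-- a genuinely different algorithm of similar cost ("alternative").


-- ===== PORT A =====
-- di / dj direction tables
def pvDI : List Int := [0, 0, 1, -1]
def pvDJ : List Int := [1, -1, 0, 0]

-- graph[i][j]; all accesses made by either port are in range under Pre_, the
-- default 0 is never read there
def pvGet2 (xs : List (List Int)) (i j : Int) : Int :=
  ((PySem.List.pyGet? xs i).bind (fun r => PySem.List.pyGet? r j)).getD 0

-- visited[i][j]
def pvVGet (v : List (List Bool)) (i j : Int) : Bool :=
  ((PySem.List.pyGet? v i).bind (fun r => PySem.List.pyGet? r j)).getD false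

-- visited[i][j] = True
def pvVSet (v : List (List Bool)) (i j : Int) : List (List Bool) :=
  v.mapIdx (fun a row =>
    if (a : Int) = i then row.mapIdx (fun b x => if (b : Int) = j then true else x) else row)

-- body of 'for idx in range(4): …' of A's BFS
def pvDirs (graph : List (List Int)) (N waterLevel ci cj : Int)
    (s : List (List Bool) × List (Int × Int)) (idx : Int) :
    List (List Bool) × List (Int × Int) :=
  let ni := ci + (PySem.List.pyGet? pvDI idx).getD 0
  let nj := cj + (PySem.List.pyGet? pvDJ idx).getD 0
  if ¬ (0 ≤ ni ∧ ni < N ∧ 0 ≤ nj ∧ nj < N) then s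
  else if pvVGet s.1 ni nj then s
  else if pvGet2 graph ni nj ≤ waterLevel then s
  else (pvVSet s.1 ni nj, s.2 ++ [(ni, nj)])

-- A's 'while q:' loop; the fuel N²+1 is a termination device only: every pop
-- after the first is preceded by an append that flips a distinct visited cell
-- from False to True, so the loop runs at most N² + 1 iterations
def pvBFS (graph : List (List Int)) (N waterLevel : Int) :
    Nat → List (List Bool) → List (Int × Int) → List (List Bool)
  | 0, v, _ => v
  | _ + 1, v, [] => v
  | fuel + 1, v, (ci, cj) :: q =>
      let s := (PySem.List.pyRange 0 4 1).foldl (pvDirs graph N waterLevel ci cj) (v, q)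
      pvBFS graph N waterLevel fuel s.1 s.2

def getIslandCnt (graph : List (List Int)) (N : Int) (waterLevel : Int) : Int :=
  let init : List (List Bool) :=
    (PySem.List.pyRange 0 N 1).map (fun _ => (PySem.List.pyRange 0 N 1).map (fun _ => false))
  let res :=
    (PySem.List.pyRange 0 N 1).foldl (fun (st : List (List Bool) × Int) i =>
      (PySem.List.pyRange 0 N 1).foldl (fun st j =>
        if pvVGet st.1 i j then st
        else if pvGet2 graph i j ≤ waterLevel then st
        else
          let v1 := pvVSet st.1 i j
          (pvBFS graph N waterLevel (N.toNat * N.toNat + 1) v1 [(i, j)], st.2 + 1)) st)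
      (init, 0)
  res.2

-- ===== PORT B =====
-- 'while parent[x] != x: x = parent[x]'; fuel x+1 is a termination device
-- only: parents are always strictly smaller indices
def pvFindAux (parent : List Int) : Nat → Int → Int
  | 0, x => x
  | fuel + 1, x =>
      let px := (PySem.List.pyGet? parent x).getD x
      if px = x then x else pvFindAux parent fuel px

def pvFind (parent : List Int) (x : Int) : Int := pvFindAux parent (x.toNat + 1) x

def pvUnion (parent : List Int) (a b : Int) : List Int :=
  let ra := pvFind parent a
  let rb := pvFind parent b
  if ra = rb then parent
  else if ra < rb then parent.mapIdx (fun k x => if (k : Int) = rb then ra else x)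
  else parent.mapIdx (fun k x => if (k : Int) = ra then rb else x)

def getIslandCnt_alt (graph : List (List Int)) (N : Int) (waterLevel : Int) : Int :=
  if N ≤ 0 then 0
  else
    let parent0 : List Int := PySem.List.pyRange 0 (N * N) 1
    let parent :=
      (PySem.List.pyRange 0 N 1).foldl (fun p i =>
        (PySem.List.pyRange 0 N 1).foldl (fun p j =>
          if pvGet2 graph i j ≤ waterLevel then p
          else
            let p1 := if j + 1 < N ∧ waterLevel < pvGet2 graph i (j + 1) then
                pvUnion p (i * N + j) (i * N + j + 1) else p
            if i + 1 < N ∧ waterLevel < pvGet2 graph (i + 1) j then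
              pvUnion p1 (i * N + j) ((i + 1) * N + j) else p1) p) parent0
    (PySem.List.pyRange 0 N 1).foldl (fun total i =>
      (PySem.List.pyRange 0 N 1).foldl (fun total j =>
        if waterLevel < pvGet2 graph i j ∧ pvFind parent (i * N + j) = i * N + j then
          total + 1 else total) total) 0

-- ===== PRECONDITION & SPEC =====
-- Pre_ excludes exactly the inputs on which the Python A raises IndexError:
-- grids whose first N rows do not all exist with at least N entries.
def Pre_getIslandCnt (graph : List (List Int)) (N : Int) (waterLevel : Int) : Prop :=
  N ≤ graph.length ∧ ∀ row ∈ graph.take N.toNat, N ≤ row.length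
instance (graph : List (List Int)) (N : Int) (waterLevel : Int) : Decidable (Pre_getIslandCnt graph N waterLevel) := by unfold Pre_getIslandCnt; infer_instance

def pvWitness_getIslandCnt : List (List Int) × Int × Int := ([[2, 1], [1, 2]], 2, 1)

def Spec_getIslandCnt (graph : List (List Int)) (N : Int) (waterLevel : Int) (out : Int) : Prop := out = getIslandCnt_alt graph N waterLevel
instance (graph : List (List Int)) (N : Int) (waterLevel : Int) (out : Int) : Decidable (Spec_getIslandCnt graph N waterLevel out) := by unfold Spec_getIslandCnt; infer_instance

-- ===== CLAIM (what is proved, stated in full; the proofs are below) =====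
def Claim_equal_getIslandCnt : Prop := ∀ (graph : List (List Int)) (N : Int) (waterLevel : Int), Dom_getIslandCnt graph N waterLevel → Pre_getIslandCnt graph N waterLevel → Spec_getIslandCnt graph N waterLevel (getIslandCnt graph N waterLevel)

-- ===== LEMMAS AND PROOFS =====

-- ---------- abstract grid notions ----------

def pvInR (N : Int) (c : Int × Int) : Prop := 0 ≤ c.1 ∧ c.1 < N ∧ 0 ≤ c.2 ∧ c.2 < N

def pvLand (graph : List (List Int)) (w : Int) (c : Int × Int) : Prop := w < pvGet2 graph c.1 c.2

def pvStep (graph : List (List Int)) (N w : Int) (c d : Int × Int) : Prop :=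
  pvInR N c ∧ pvInR N d ∧ pvLand graph w c ∧ pvLand graph w d ∧
    ((c.1 = d.1 ∧ (d.2 = c.2 + 1 ∨ c.2 = d.2 + 1)) ∨ (c.2 = d.2 ∧ (d.1 = c.1 + 1 ∨ c.1 = d.1 + 1)))

def pvConn (graph : List (List Int)) (N w : Int) : (Int × Int) → (Int × Int) → Prop :=
  Relation.ReflTransGen (pvStep graph N w)

lemma pvStep_symm (graph : List (List Int)) (N w : Int) {c d : Int × Int}
    (h : pvStep graph N w c d) : pvStep graph N w d c := by
  obtain ⟨h1, h2, h3, h4, h5⟩ := h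
  exact ⟨h2, h1, h4, h3, by tauto⟩

lemma pvConn_symm (graph : List (List Int)) (N w : Int) {c d : Int × Int}
    (h : pvConn graph N w c d) : pvConn graph N w d c :=
  Relation.ReflTransGen.symmetric (fun _ _ hs => pvStep_symm graph N w hs) h

lemma pvConn_props (graph : List (List Int)) (N w : Int) {c d : Int × Int}
    (h : pvConn graph N w c d) (hne : c ≠ d) :
    (pvInR N c ∧ pvLand graph w c) ∧ (pvInR N d ∧ pvLand graph w d) := by
  induction h using Relation.ReflTransGen.head_induction_on with
  | refl => exact absurd rfl hne
  | head hstep htail ih =>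
    rename_i a b
    obtain ⟨h1, h2, h3, h4, _⟩ := hstep
    refine ⟨⟨h1, h3⟩, ?_⟩
    by_cases hbd : b = d
    · subst hbd; exact ⟨h2, h4⟩
    · exact (ih hbd).2

lemma pvConn_refl (graph : List (List Int)) (N w : Int) (c : Int × Int) :
    pvConn graph N w c c := Relation.ReflTransGen.refl

lemma pvConn_single (graph : List (List Int)) (N w : Int) {c d : Int × Int}
    (h : pvStep graph N w c d) : pvConn graph N w c d := Relation.ReflTransGen.single h

lemma pvConn_trans (graph : List (List Int)) (N w : Int) {a b c : Int × Int}
    (h1 : pvConn graph N w a b) (h2 : pvConn graph N w b c) : pvConn graph N w a c :=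
  Relation.ReflTransGen.trans h1 h2

-- ---------- index encoding ----------

def pvEnc (N : Int) (c : Int × Int) : Int := c.1 * N + c.2

def pvDec (N x : Int) : Int × Int := (x / N, x % N)

lemma pvEnc_bounds {N : Int} {c : Int × Int} (hc : pvInR N c) : 0 ≤ pvEnc N c ∧ pvEnc N c < N * N := by
  obtain ⟨h1, h2, h3, h4⟩ := hc
  unfold pvEnc
  constructor
  · have : 0 ≤ c.1 * N := mul_nonneg h1 (by omega)
    omega
  · nlinarith

lemma pvDec_enc {N : Int} {c : Int × Int} (hc : pvInR N c) : pvDec N (pvEnc N c) = c := by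
  obtain ⟨h1, h2, h3, h4⟩ := hc
  unfold pvDec pvEnc
  have hdiv : (c.1 * N + c.2) / N = c.1 := by
    rw [add_comm, Int.add_mul_ediv_right _ _ (by omega : N ≠ 0), Int.ediv_eq_zero_of_lt h3 h4]
    omega
  have hmod : (c.1 * N + c.2) % N = c.2 := by
    simp [Int.mul_emod_left, Int.add_emod]
    exact Int.emod_eq_of_lt h3 h4
  rw [hdiv, hmod]

lemma pvEnc_dec {N x : Int} (hN : 0 < N) (h0 : 0 ≤ x) (h1 : x < N * N) :
    pvEnc N (pvDec N x) = x ∧ pvInR N (pvDec N x) := by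
  unfold pvEnc pvDec
  have e := Int.ediv_add_emod x N
  have m0 := Int.emod_nonneg x (by omega : N ≠ 0)
  have m1 := Int.emod_lt_of_pos x hN
  have d0 : 0 ≤ x / N := Int.ediv_nonneg h0 (by omega)
  have d1 : x / N < N := by
    by_contra hcon
    push_neg at hcon
    nlinarith
  refine ⟨by linarith [e], d0, d1, m0, m1⟩

lemma pvEnc_lt {N : Int} {c d : Int × Int} (hc : pvInR N c) (hd : pvInR N d) :
    pvEnc N c < pvEnc N d ↔ (c.1 < d.1 ∨ (c.1 = d.1 ∧ c.2 < d.2)) := by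
  obtain ⟨a1, a2, a3, a4⟩ := hc
  obtain ⟨b1, b2, b3, b4⟩ := hd
  unfold pvEnc
  constructor
  · intro h
    by_contra hcon
    push_neg at hcon
    obtain ⟨h5, h6⟩ : d.1 ≤ c.1 ∧ (c.1 = d.1 → d.2 ≤ c.2) := by
      constructor
      · omega
      · intro he
        have := hcon.2
        omega
    rcases lt_or_eq_of_le h5 with h7 | h7
    · nlinarith
    · have := h6 h7.symm; nlinarith
  · intro h
    rcases h with h | ⟨h7, h8⟩
    · nlinarith
    · nlinarith

-- scan order
def pvBefore (i j : Int) (c : Int × Int) : Prop := c.1 < i ∨ (c.1 = i ∧ c.2 < j)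

lemma pvBefore_iff_enc {N : Int} {c d : Int × Int} (hc : pvInR N c) (hd : pvInR N d) :
    pvBefore d.1 d.2 c ↔ pvEnc N c < pvEnc N d := by
  rw [pvEnc_lt hc hd]
  unfold pvBefore
  tauto

-- ---------- generic fold helpers ----------

lemma pvFoldl_prefix {σ : Type} (f : σ → Int → σ) (b : Int) (P : Int → σ → Prop)
    (hstep : ∀ (j : Int) (st : σ), 0 ≤ j → j < b → P j st → P (j + 1) (f st j)) :
    ∀ (m : Nat) (st0 : σ), (m : Int) ≤ b → P 0 st0 →
      P (m : Int) ((PySem.List.pyRange 0 (m : Int) 1).foldl f st0) := by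
  intro m
  induction m with
  | zero =>
    intro st0 _ h0
    simpa [PySem.List.pyRange_one_eq_nil] using h0
  | succ k ih =>
    intro st0 hm h0
    have hk : (k : Int) ≤ b := by push_cast at hm ⊢; omega
    have hsplit : PySem.List.pyRange 0 ((k : Nat) + 1 : Int) 1
        = PySem.List.pyRange 0 (k : Int) 1 ++ [(k : Int)] :=
      PySem.List.pyRange_one_succ_right (by positivity)
    have : ((k + 1 : Nat) : Int) = ((k : Nat) + 1 : Int) := by push_cast; ring
    rw [this, hsplit, List.foldl_append]
    simp only [List.foldl_cons, List.foldl_nil]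
    exact hstep _ _ (by positivity) (by push_cast at hm ⊢; omega) (ih st0 hk h0)

lemma pvFoldl_ite_add (Q : Int → Prop) [DecidablePred Q] (xs : List Int) (t : Int) :
    xs.foldl (fun a x => if Q x then a + 1 else a) t
      = t + xs.foldl (fun a x => if Q x then a + 1 else a) 0 := by
  induction xs generalizing t with
  | nil => simp
  | cons x xs ih =>
    simp only [List.foldl_cons]
    by_cases h : Q x
    · simp only [if_pos h]
      rw [ih (t+1), ih (0+1)]
      ring
    · simp only [if_neg h]
      exact ih t

-- ---------- visited-matrix toolkit ----------

def pvShape (N : Int) (v : List (List Bool)) : Prop :=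
  v.length = N.toNat ∧ ∀ r ∈ v, r.length = N.toNat

def pvVS (v : List (List Bool)) (c : Int × Int) : Prop := pvVGet v c.1 c.2 = true

def pvMu (v : List (List Bool)) : Nat := (v.map (fun r => r.count false)).sum

lemma pvVGet_nonneg (v : List (List Bool)) {i j : Int} (hi : 0 ≤ i) (hj : 0 ≤ j) :
    pvVGet v i j = ((v[i.toNat]?).bind (fun r => r[j.toNat]?)).getD false := by
  unfold pvVGet
  rw [PySem.List.pyGet?_of_nonneg v hi]
  cases h : v[i.toNat]? with
  | none => simp
  | some r => simp [PySem.List.pyGet?_of_nonneg r hj]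

lemma pvRowSet (row : List Bool) {j : Int} (hj : 0 ≤ j) :
    row.mapIdx (fun b x => if (b : Int) = j then true else x) = row.set j.toNat true := by
  apply List.ext_getElem?
  intro m
  rw [List.getElem?_mapIdx, List.getElem?_set]
  by_cases hm : m = j.toNat
  · have hj' : ((m : Int) = j) := by omega
    rw [if_pos hm.symm]
    cases h : row[m]? with
    | none =>
      have hlen : row.length ≤ m := by simpa [List.getElem?_eq_none_iff] using h
      rw [if_neg (by omega : ¬ j.toNat < row.length)]
      simp
    | some x =>
      have hlt : m < row.length := by
        by_contra hc
        push_neg at hc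
        simp [List.getElem?_eq_none_iff.mpr hc] at h
      rw [if_pos (by omega : j.toNat < row.length)]
      simp [hj']
  · have hj' : ¬ ((m : Int) = j) := by omega
    rw [if_neg (fun hh => hm hh.symm)]
    cases row[m]? <;> simp [hj']

lemma pvVSet_eq (v : List (List Bool)) {i j : Int} (hi : 0 ≤ i) (hj : 0 ≤ j) :
    pvVSet v i j = match v[i.toNat]? with
      | some row => v.set i.toNat (row.set j.toNat true)
      | none => v := by
  unfold pvVSet
  cases h : v[i.toNat]? with
  | none =>
    have hlen : v.length ≤ i.toNat := by simpa [List.getElem?_eq_none_iff] using h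
    apply List.ext_getElem?
    intro k
    rw [List.getElem?_mapIdx]
    cases hk : v[k]? with
    | none => simp
    | some row =>
      have : k < v.length := by
        by_contra hc
        push_neg at hc
        simp [List.getElem?_eq_none_iff.mpr hc] at hk
      have : ¬ ((k : Int) = i) := by omega
      simp [this]
  | some row =>
    have hilen : i.toNat < v.length := by
      by_contra hc
      push_neg at hc
      simp [List.getElem?_eq_none_iff.mpr hc] at h
    apply List.ext_getElem?
    intro k
    rw [List.getElem?_mapIdx, List.getElem?_set]
    by_cases hk : k = i.toNat
    · have hi' : ((k : Int) = i) := by omega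
      rw [if_pos hk.symm, if_pos (hk ▸ hilen), hk, h]
      simp only [Option.map_some, Option.some_inj]
      rw [if_pos (by omega : ((i.toNat : Int) = i))]
      exact pvRowSet row hj
    · have hi' : ¬ ((k : Int) = i) := by omega
      rw [if_neg (fun hh => hk hh.symm)]
      cases v[k]? <;> simp [hi']

lemma pvShape_vset (N : Int) (v : List (List Bool)) (i j : Int) (h : pvShape N v) :
    pvShape N (pvVSet v i j) := by
  obtain ⟨h1, h2⟩ := h
  unfold pvVSet
  constructor
  · simpa using h1
  · intro r hr
    rw [List.mem_iff_getElem?] at hr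
    obtain ⟨k, hk⟩ := hr
    rw [List.getElem?_mapIdx] at hk
    cases hv : v[k]? with
    | none => simp [hv] at hk
    | some row =>
      have hrow : row ∈ v := List.mem_of_getElem? hv
      rw [hv] at hk
      simp only [Option.map_some, Option.some_inj] at hk
      by_cases hki : (k : Int) = i
      · rw [if_pos hki] at hk
        rw [← hk]
        simpa using h2 row hrow
      · rw [if_neg hki] at hk
        rw [← hk]
        exact h2 row hrow

lemma pvVS_vset_self {N : Int} {v : List (List Bool)} {c : Int × Int}
    (hsh : pvShape N v) (hc : pvInR N c) : pvVS (pvVSet v c.1 c.2) c := by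
  obtain ⟨hsh1, hsh2⟩ := hsh
  obtain ⟨h1, h2, h3, h4⟩ := hc
  have hilen : c.1.toNat < v.length := by omega
  have hrow : v[c.1.toNat]? = some v[c.1.toNat] := List.getElem?_eq_getElem hilen
  have hjlen : c.2.toNat < v[c.1.toNat].length := by
    have := hsh2 _ (List.getElem_mem hilen)
    omega
  unfold pvVS
  rw [pvVSet_eq v h1 h3, hrow]
  rw [pvVGet_nonneg _ h1 h3]
  rw [List.getElem?_set, if_pos rfl, if_pos (by simpa using hilen)]
  simp [List.getElem?_set, hjlen]

lemma pvVS_vset_other {v : List (List Bool)} {c x : Int × Int}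
    (hc1 : 0 ≤ c.1) (hc2 : 0 ≤ c.2) (hx1 : 0 ≤ x.1) (hx2 : 0 ≤ x.2) (hne : x ≠ c) :
    (pvVS (pvVSet v c.1 c.2) x ↔ pvVS v x) := by
  unfold pvVS
  rw [pvVSet_eq v hc1 hc2]
  cases h : v[c.1.toNat]? with
  | none => rfl
  | some row =>
    rw [pvVGet_nonneg _ hx1 hx2, pvVGet_nonneg _ hx1 hx2]
    have hilen : c.1.toNat < v.length := by
      by_contra hcon
      push_neg at hcon
      simp [List.getElem?_eq_none_iff.mpr hcon] at h
    rw [List.getElem?_set]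
    by_cases h1 : c.1.toNat = x.1.toNat
    · have hx1c : x.1 = c.1 := by omega
      have hx2c : x.2 ≠ c.2 := fun hx2c => hne (Prod.ext hx1c hx2c)
      have h2 : ¬ (c.2.toNat = x.2.toNat) := by omega
      rw [if_pos h1, if_pos hilen, ← h1, h]
      simp only [Option.bind_some, List.getElem?_set, if_neg h2]
    · rw [if_neg h1]

lemma pvSumMapSet (l : List Nat) (n : Nat) (a : Nat) (h : n < l.length) :
    (l.set n a).sum + l[n] = l.sum + a := by
  induction l generalizing n with
  | nil => simp at h
  | cons x xs ih =>
    cases n with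
    | zero => simp [List.set]; omega
    | succ m =>
      simp only [List.set, List.sum_cons, List.getElem_cons_succ]
      have := ih m (by simpa using h)
      omega

lemma pvMu_vset {N : Int} {v : List (List Bool)} {c : Int × Int}
    (hsh : pvShape N v) (hc : pvInR N c) (hfalse : ¬ pvVS v c) :
    pvMu (pvVSet v c.1 c.2) + 1 = pvMu v := by
  obtain ⟨hsh1, hsh2⟩ := hsh
  obtain ⟨h1, h2, h3, h4⟩ := hc
  have hilen : c.1.toNat < v.length := by omega
  set row := v[c.1.toNat] with hrowdef
  have hrow : v[c.1.toNat]? = some row := List.getElem?_eq_getElem hilen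
  have hjlen : c.2.toNat < row.length := by
    have hh : v[c.1.toNat].length = N.toNat := hsh2 _ (List.getElem_mem hilen)
    rw [← hrowdef] at hh
    omega
  have hfj : row[c.2.toNat] = false := by
    unfold pvVS at hfalse
    rw [pvVGet_nonneg _ h1 h3, hrow] at hfalse
    simp only [Option.bind_some] at hfalse
    rw [List.getElem?_eq_getElem hjlen] at hfalse
    simpa using hfalse
  have hcount : (row.set c.2.toNat true).count false + 1 = row.count false := by
    have hpos : 0 < row.count false := by
      rw [List.count_pos_iff]
      exact hfj ▸ List.getElem_mem hjlen
    rw [List.count_set hjlen]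
    simp [hfj]
    omega
  unfold pvMu
  rw [pvVSet_eq v h1 h3, hrow, List.map_set]
  have hmlen : c.1.toNat < (v.map (fun r => r.count false)).length := by simpa using hilen
  have hs := pvSumMapSet (v.map (fun r => r.count false)) c.1.toNat
    ((row.set c.2.toNat true).count false) hmlen
  rw [List.getElem_map, ← hrowdef] at hs
  omega

lemma pvMu_le {N : Int} {v : List (List Bool)} (hsh : pvShape N v) :
    pvMu v ≤ N.toNat * N.toNat := by
  obtain ⟨h1, h2⟩ := hsh
  unfold pvMu
  have hb : ∀ x ∈ v.map (fun r => r.count false), x ≤ N.toNat := by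
    intro x hx
    rw [List.mem_map] at hx
    obtain ⟨r, hr, hrx⟩ := hx
    calc x = r.count false := hrx.symm
    _ ≤ r.length := List.count_le_length
    _ = N.toNat := h2 r hr
  calc (v.map (fun r => r.count false)).sum
      ≤ (v.map (fun r => r.count false)).length • N.toNat := List.sum_le_card_nsmul _ _ hb
    _ = N.toNat * N.toNat := by simp [h1]

lemma pvVS_init {N : Int} {x : Int × Int} (hx1 : 0 ≤ x.1) (hx2 : 0 ≤ x.2) :
    ¬ pvVS ((PySem.List.pyRange 0 N 1).map
      (fun _ => (PySem.List.pyRange 0 N 1).map (fun _ => false))) x := by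
  intro hvs
  unfold pvVS at hvs
  rw [pvVGet_nonneg _ hx1 hx2, List.getElem?_map] at hvs
  cases h : (PySem.List.pyRange 0 N 1)[x.1.toNat]? with
  | none => simp [h] at hvs
  | some a =>
    rw [h] at hvs
    simp only [Option.map_some, Option.bind_some, List.getElem?_map] at hvs
    cases h2 : (PySem.List.pyRange 0 N 1)[x.2.toNat]? with
    | none => simp [h2] at hvs
    | some b => simp [h2] at hvs

lemma pvShape_init (N : Int) :
    pvShape N ((PySem.List.pyRange 0 N 1).map
      (fun _ => (PySem.List.pyRange 0 N 1).map (fun _ => false))) := by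
  constructor
  · simp [PySem.List.length_pyRange_one]
  · intro r hr
    rw [List.mem_map] at hr
    obtain ⟨a, _, hra⟩ := hr
    rw [← hra]
    simp [PySem.List.length_pyRange_one]

-- ---------- union-find toolkit ----------

def pvWf (N : Int) (p : List Int) : Prop :=
  p.length = (N * N).toNat ∧ ∀ k : Nat, k < p.length → 0 ≤ p.getD k 0 ∧ p.getD k 0 ≤ (k : Int)

lemma pvFindAux_succ (p : List Int) (fuel : Nat) (x : Int) :
    pvFindAux p (fuel + 1) x =
      (if (PySem.List.pyGet? p x).getD x = x then x
       else pvFindAux p fuel ((PySem.List.pyGet? p x).getD x)) := rfl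

lemma pvGetDBridge {p : List Int} {x : Int} (h0 : 0 ≤ x) (h1 : x < (p.length : Int)) :
    (PySem.List.pyGet? p x).getD x = p.getD x.toNat 0 := by
  rw [PySem.List.pyGet?_of_nonneg p h0,
      List.getElem?_eq_getElem (by omega : x.toNat < p.length),
      List.getD_eq_getElem?_getD, List.getElem?_eq_getElem (by omega : x.toNat < p.length)]
  rfl

lemma pvFindAux_fuel {N : Int} {p : List Int} (hwf : pvWf N p) :
    ∀ (x : Int) (fuel : Nat), 0 ≤ x → x < (p.length : Int) → x.toNat < fuel →
      pvFindAux p fuel x = pvFind p x := by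
  have H : ∀ n : Nat, ∀ x : Int, ∀ fuel : Nat, x.toNat ≤ n → 0 ≤ x → x < (p.length : Int) →
      x.toNat < fuel → pvFindAux p fuel x = pvFindAux p (x.toNat + 1) x := by
    intro n
    induction n with
    | zero =>
      intro x fuel hn h0 h1 hf
      have hx : x = 0 := by omega
      subst hx
      obtain ⟨f, rfl⟩ : ∃ f, fuel = f + 1 := ⟨fuel - 1, by omega⟩
      rw [pvFindAux_succ, pvFindAux_succ, pvGetDBridge (by omega) h1]
      have hw := hwf.2 (0 : Int).toNat (by omega)
      have hz : p.getD (0 : Int).toNat 0 = 0 := by omega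
      rw [hz]
      simp
    | succ k ih =>
      intro x fuel hn h0 h1 hf
      obtain ⟨f, rfl⟩ : ∃ f, fuel = f + 1 := ⟨fuel - 1, by omega⟩
      rw [pvFindAux_succ, pvFindAux_succ, pvGetDBridge h0 h1]
      by_cases hroot : p.getD x.toNat 0 = x
      · rw [if_pos hroot, if_pos hroot]
      · rw [if_neg hroot, if_neg hroot]
        have hw := hwf.2 x.toNat (by omega)
        have hpx0 : 0 ≤ p.getD x.toNat 0 := hw.1
        have hpxlt : p.getD x.toNat 0 < x := by omega
        have h1' : p.getD x.toNat 0 < (p.length : Int) := by omega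
        rw [ih _ f (by omega) hpx0 h1' (by omega), ih _ x.toNat (by omega) hpx0 h1' (by omega)]
  intro x fuel h0 h1 hf
  exact H x.toNat x fuel (le_refl _) h0 h1 hf

lemma pvFind_rec {N : Int} {p : List Int} (hwf : pvWf N p) {x : Int}
    (h0 : 0 ≤ x) (h1 : x < (p.length : Int)) :
    pvFind p x = (if p.getD x.toNat 0 = x then x else pvFind p (p.getD x.toNat 0)) := by
  show pvFindAux p (x.toNat + 1) x = _
  rw [pvFindAux_succ, pvGetDBridge h0 h1]
  by_cases hroot : p.getD x.toNat 0 = x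
  · rw [if_pos hroot, if_pos hroot]
  · rw [if_neg hroot, if_neg hroot]
    have hw := hwf.2 x.toNat (by omega)
    exact pvFindAux_fuel hwf _ _ hw.1 (by omega) (by omega)

lemma pvFind_props {N : Int} {p : List Int} (hwf : pvWf N p) {x : Int}
    (h0 : 0 ≤ x) (h1 : x < (p.length : Int)) :
    0 ≤ pvFind p x ∧ pvFind p x ≤ x ∧ p.getD (pvFind p x).toNat 0 = pvFind p x := by
  have H : ∀ n : Nat, ∀ x : Int, x.toNat ≤ n → 0 ≤ x → x < (p.length : Int) →
      0 ≤ pvFind p x ∧ pvFind p x ≤ x ∧ p.getD (pvFind p x).toNat 0 = pvFind p x := by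
    intro n
    induction n with
    | zero =>
      intro x hn h0 h1
      have hx : x = 0 := by omega
      subst hx
      have hw := hwf.2 (0 : Int).toNat (by omega)
      have hz : p.getD (0 : Int).toNat 0 = 0 := by omega
      rw [pvFind_rec hwf h0 h1, hz, if_pos rfl]
      exact ⟨le_refl _, le_refl _, hz⟩
    | succ k ih =>
      intro x hn h0 h1
      rw [pvFind_rec hwf h0 h1]
      by_cases hroot : p.getD x.toNat 0 = x
      · rw [if_pos hroot]
        exact ⟨h0, le_refl x, by rw [hroot]⟩
      · rw [if_neg hroot]
        have hw := hwf.2 x.toNat (by omega)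
        have := ih (p.getD x.toNat 0) (by omega) hw.1 (by omega)
        exact ⟨this.1, by omega, this.2.2⟩
  exact H x.toNat x (le_refl _) h0 h1

-- the write performed by pvUnion, abstractly: remap root R to root m
lemma pvFind_write {N : Int} {p : List Int} (hwf : pvWf N p) {R m : Int}
    (hR0 : 0 ≤ R) (hR1 : R < (p.length : Int)) (hRroot : p.getD R.toNat 0 = R)
    (hm0 : 0 ≤ m) (hmR : m < R) (hmroot : p.getD m.toNat 0 = m) :
    pvWf N (p.mapIdx (fun k x => if (k : Int) = R then m else x)) ∧
    ∀ x : Int, 0 ≤ x → x < (p.length : Int) →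
      pvFind (p.mapIdx (fun k x => if (k : Int) = R then m else x)) x
        = (if pvFind p x = R then m else pvFind p x) := by
  set p' := p.mapIdx (fun k x => if (k : Int) = R then m else x) with hp'
  have hlen : p'.length = p.length := by simp [hp']
  have hget : ∀ k : Nat, k < p.length →
      p'.getD k 0 = if (k : Int) = R then m else p.getD k 0 := by
    intro k hk
    rw [hp', List.getD_eq_getElem?_getD, List.getElem?_mapIdx, List.getElem?_eq_getElem hk,
        List.getD_eq_getElem?_getD, List.getElem?_eq_getElem hk]
    rfl
  have hwf' : pvWf N p' := by
    constructor
    · rw [hlen]; exact hwf.1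
    · intro k hk
      rw [hlen] at hk
      rw [hget k hk]
      by_cases hkR : (k : Int) = R
      · rw [if_pos hkR]
        exact ⟨hm0, by omega⟩
      · rw [if_neg hkR]
        exact hwf.2 k hk
  refine ⟨hwf', ?_⟩
  have H : ∀ n : Nat, ∀ x : Int, x.toNat ≤ n → 0 ≤ x → x < (p.length : Int) →
      pvFind p' x = (if pvFind p x = R then m else pvFind p x) := by
    intro n
    induction n with
    | zero =>
      intro x hn h0 h1
      have hx : x = 0 := by omega
      subst hx
      have hR : ¬ (((0 : Int).toNat : Int) = R) := by omega
      have hw := hwf.2 (0 : Int).toNat (by omega)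
      have hz : p.getD (0 : Int).toNat 0 = 0 := by omega
      have hfx : pvFind p 0 = 0 := by rw [pvFind_rec hwf (by omega) h1, hz, if_pos rfl]
      rw [pvFind_rec hwf' (by omega) (by omega), hget _ (by omega), if_neg hR, hz, if_pos rfl,
          hfx, if_neg (by omega : ¬ (0 : Int) = R)]
    | succ k ih =>
      intro x hn h0 h1
      rw [pvFind_rec hwf' h0 (by omega), hget _ (by omega)]
      by_cases hxR : ((x.toNat : Int) = R)
      · have hxR' : x = R := by omega
        rw [if_pos hxR, if_neg (by omega : ¬ m = x)]
        have hfm : pvFind p' m = m := by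
          rw [pvFind_rec hwf' hm0 (by omega), hget _ (by omega),
              if_neg (by omega : ¬ ((m.toNat : Int) = R)), hmroot, if_pos rfl]
        have hfx : pvFind p x = x := by
          rw [pvFind_rec hwf h0 h1]
          have : p.getD x.toNat 0 = x := by
            rw [hxR']
            exact hRroot
          rw [this, if_pos rfl]
        rw [hfm, hfx, if_pos hxR']
      · rw [if_neg hxR]
        by_cases hroot : p.getD x.toNat 0 = x
        · rw [if_pos hroot]
          have hfx : pvFind p x = x := by rw [pvFind_rec hwf h0 h1, if_pos hroot]
          rw [hfx, if_neg (by omega : ¬ x = R)]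
        · rw [if_neg hroot]
          have hw := hwf.2 x.toNat (by omega)
          rw [ih (p.getD x.toNat 0) (by omega) hw.1 (by omega)]
          have hfx : pvFind p x = pvFind p (p.getD x.toNat 0) := by
            rw [pvFind_rec hwf h0 h1, if_neg hroot]
          rw [hfx]
  intro x h0 h1
  exact H x.toNat x (le_refl _) h0 h1

lemma pvUnion_spec {N : Int} {p : List Int} (hwf : pvWf N p) {a b : Int}
    (ha0 : 0 ≤ a) (ha1 : a < (p.length : Int)) (hb0 : 0 ≤ b) (hb1 : b < (p.length : Int)) :
    pvWf N (pvUnion p a b) ∧ (pvUnion p a b).length = p.length ∧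
    pvFind (pvUnion p a b) a = pvFind (pvUnion p a b) b ∧
    (∀ x y : Int, 0 ≤ x → x < (p.length : Int) → 0 ≤ y → y < (p.length : Int) →
      pvFind p x = pvFind p y → pvFind (pvUnion p a b) x = pvFind (pvUnion p a b) y) ∧
    (∀ x : Int, 0 ≤ x → x < (p.length : Int) →
      pvFind (pvUnion p a b) x = pvFind p x ∨
      (pvFind (pvUnion p a b) x = pvFind p a ∧ pvFind p x = pvFind p b) ∨
      (pvFind (pvUnion p a b) x = pvFind p b ∧ pvFind p x = pvFind p a)) := by
  obtain ⟨pa0, pa1, paroot⟩ := pvFind_props hwf ha0 ha1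
  obtain ⟨pb0, pb1, pbroot⟩ := pvFind_props hwf hb0 hb1
  simp only [pvUnion]
  by_cases he : pvFind p a = pvFind p b
  · rw [if_pos he]
    exact ⟨hwf, rfl, he, fun x y _ _ _ _ h => h, fun x _ _ => Or.inl rfl⟩
  · rw [if_neg he]
    by_cases hlt : pvFind p a < pvFind p b
    · rw [if_pos hlt]
      obtain ⟨hwf', hform⟩ := pvFind_write hwf (R := pvFind p b) (m := pvFind p a)
        pb0 (by omega) pbroot pa0 hlt paroot
      refine ⟨hwf', by simp, ?_, ?_, ?_⟩
      · rw [hform a ha0 ha1, hform b hb0 hb1, if_neg he, if_pos rfl]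
      · intro x y hx0 hx1 hy0 hy1 hxy
        rw [hform x hx0 hx1, hform y hy0 hy1, hxy]
      · intro x hx0 hx1
        rw [hform x hx0 hx1]
        by_cases hc : pvFind p x = pvFind p b
        · rw [if_pos hc]
          exact Or.inr (Or.inl ⟨rfl, hc⟩)
        · rw [if_neg hc]
          exact Or.inl rfl
    · rw [if_neg hlt]
      have hgt : pvFind p b < pvFind p a := by omega
      obtain ⟨hwf', hform⟩ := pvFind_write hwf (R := pvFind p a) (m := pvFind p b)
        pa0 (by omega) paroot pb0 hgt pbroot
      refine ⟨hwf', by simp, ?_, ?_, ?_⟩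
      · rw [hform a ha0 ha1, hform b hb0 hb1, if_pos rfl, if_neg (by omega : ¬ pvFind p b = pvFind p a)]
      · intro x y hx0 hx1 hy0 hy1 hxy
        rw [hform x hx0 hx1, hform y hy0 hy1, hxy]
      · intro x hx0 hx1
        rw [hform x hx0 hx1]
        by_cases hc : pvFind p x = pvFind p a
        · rw [if_pos hc]
          exact Or.inr (Or.inr ⟨rfl, hc⟩)
        · rw [if_neg hc]
          exact Or.inl rfl

-- connectivity invariant of the DSU
def pvCInv (graph : List (List Int)) (N w : Int) (p : List Int) : Prop :=
  ∀ x : Int, 0 ≤ x → x < N * N →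
    pvFind p x = x ∨ pvConn graph N w (pvDec N (pvFind p x)) (pvDec N x)

lemma pvCInv_union (graph : List (List Int)) {N w : Int} {p : List Int} (hN : 0 < N)
    (hwf : pvWf N p) (hci : pvCInv graph N w p) {a b : Int}
    (ha0 : 0 ≤ a) (ha1 : a < N * N) (hb0 : 0 ≤ b) (hb1 : b < N * N)
    (hconn : pvConn graph N w (pvDec N a) (pvDec N b)) :
    pvCInv graph N w (pvUnion p a b) := by
  have hlenp : (p.length : Int) = N * N := by
    have h1 := hwf.1
    have hnn : 0 ≤ N * N := by positivity
    omega
  have hrc : ∀ y : Int, 0 ≤ y → y < N * N →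
      pvConn graph N w (pvDec N (pvFind p y)) (pvDec N y) := by
    intro y hy0 hy1
    rcases hci y hy0 hy1 with h | h
    · rw [h]
      exact pvConn_refl _ _ _ _
    · exact h
  intro x hx0 hx1
  right
  have hspec := pvUnion_spec hwf ha0 (by omega) hb0 (by omega)
  rcases hspec.2.2.2.2 x hx0 (by omega) with h | ⟨h1, h2⟩ | ⟨h1, h2⟩
  · rw [h]
    exact hrc x hx0 hx1
  · rw [h1]
    have c1 := hrc a ha0 ha1
    have c2 := hrc b hb0 hb1
    have c3 := hrc x hx0 hx1
    rw [h2] at c3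
    exact pvConn_trans _ _ _ c1 (pvConn_trans _ _ _ hconn
      (pvConn_trans _ _ _ (pvConn_symm _ _ _ c2) c3))
  · rw [h1]
    have c1 := hrc a ha0 ha1
    have c2 := hrc b hb0 hb1
    have c3 := hrc x hx0 hx1
    rw [h2] at c3
    exact pvConn_trans _ _ _ c2 (pvConn_trans _ _ _ (pvConn_symm _ _ _ hconn)
      (pvConn_trans _ _ _ (pvConn_symm _ _ _ c1) c3))

-- edge facts established so far by B's scan
def pvEdges (graph : List (List Int)) (N w : Int) (p : List Int) (i j : Int) : Prop :=
  ∀ c : Int × Int, pvInR N c → pvBefore i j c → pvLand graph w c →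
    ((c.2 + 1 < N → pvLand graph w (c.1, c.2 + 1) →
        pvFind p (pvEnc N c) = pvFind p (pvEnc N (c.1, c.2 + 1))) ∧
     (c.1 + 1 < N → pvLand graph w (c.1 + 1, c.2) →
        pvFind p (pvEnc N c) = pvFind p (pvEnc N (c.1 + 1, c.2))))

-- the body of B's per-cell scan step, zeta-expanded (defeq to the lambda in the port)
def pvBBody (graph : List (List Int)) (N w : Int) (p : List Int) (i j : Int) : List Int :=
  if pvGet2 graph i j ≤ w then p
  else
    if i + 1 < N ∧ w < pvGet2 graph (i + 1) j then
      pvUnion (if j + 1 < N ∧ w < pvGet2 graph i (j + 1) then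
          pvUnion p (i * N + j) (i * N + j + 1) else p) (i * N + j) ((i + 1) * N + j)
    else
      (if j + 1 < N ∧ w < pvGet2 graph i (j + 1) then
          pvUnion p (i * N + j) (i * N + j + 1) else p)

lemma pvB_cell (graph : List (List Int)) {N w i j : Int} (hN : 0 < N)
    (hi0 : 0 ≤ i) (hi1 : i < N) (hj0 : 0 ≤ j) (hj1 : j < N) {p : List Int}
    (hwf : pvWf N p) (hci : pvCInv graph N w p) (hed : pvEdges graph N w p i j) :
    pvWf N (pvBBody graph N w p i j) ∧ pvCInv graph N w (pvBBody graph N w p i j) ∧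
      pvEdges graph N w (pvBBody graph N w p i j) i (j + 1) := by
  have hplen : (p.length : Int) = N * N := by
    have h1 := hwf.1
    have : 0 ≤ N * N := by positivity
    omega
  have hcell : pvInR N (i, j) := ⟨hi0, hi1, hj0, hj1⟩
  have hcb : 0 ≤ i * N + j ∧ i * N + j < N * N := pvEnc_bounds hcell
  have hdecc : pvDec N (i * N + j) = (i, j) := pvDec_enc hcell
  -- the new cell in scan position, for the Edges extension
  have hnewcell : ∀ c : Int × Int, pvInR N c → pvBefore i (j + 1) c → ¬ pvBefore i j c →
      c = (i, j) := by
    intro c hc hb hbij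
    rcases hb with h | ⟨h1, h2⟩
    · exact absurd (Or.inl h) hbij
    · refine Prod.ext h1 ?_
      by_cases hcj : c.2 < j
      · exact absurd (Or.inr ⟨h1, hcj⟩) hbij
      · omega
  unfold pvBBody
  by_cases hw0 : pvGet2 graph i j ≤ w
  · rw [if_pos hw0]
    refine ⟨hwf, hci, ?_⟩
    intro c hc hb hl
    by_cases hbij : pvBefore i j c
    · exact hed c hc hbij hl
    · exfalso
      have hcij := hnewcell c hc hb hbij
      rw [hcij] at hl
      exact absurd hl (not_lt.mpr hw0)
  · rw [if_neg hw0]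
    have hlij : pvLand graph w (i, j) := by
      show w < pvGet2 graph i j
      omega
    by_cases hc1 : j + 1 < N ∧ w < pvGet2 graph i (j + 1)
    all_goals by_cases hc2 : i + 1 < N ∧ w < pvGet2 graph (i + 1) j
    -- case hc1 true, hc2 true
    · rw [if_pos hc2, if_pos hc1]
      have hcellR : pvInR N (i, j + 1) := ⟨hi0, hi1, by omega, hc1.1⟩
      have hRb' : 0 ≤ pvEnc N (i, j + 1) ∧ pvEnc N (i, j + 1) < N * N := pvEnc_bounds hcellR
      have heR : pvEnc N (i, j + 1) = i * N + j + 1 := by unfold pvEnc; ring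
      have hRb : 0 ≤ i * N + j + 1 ∧ i * N + j + 1 < N * N := heR ▸ hRb'
      have hconnR : pvConn graph N w (pvDec N (i * N + j)) (pvDec N (i * N + j + 1)) := by
        have hdecR : pvDec N (i * N + j + 1) = (i, j + 1) := by
          rw [← heR]
          exact pvDec_enc hcellR
        rw [hdecc, hdecR]
        exact pvConn_single _ _ _ ⟨hcell, hcellR, hlij, hc1.2, Or.inl ⟨rfl, Or.inl rfl⟩⟩
      have hu1 := pvUnion_spec hwf (a := i * N + j) (b := i * N + j + 1)
        (by omega) (by omega) (by omega) (by omega)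
      have hci1 := pvCInv_union graph hN hwf hci (by omega) (by omega) (by omega) (by omega) hconnR
      have hlen1 := hu1.2.1
      have hcellD : pvInR N (i + 1, j) := ⟨by omega, hc2.1, hj0, hj1⟩
      have hDb' : 0 ≤ pvEnc N (i + 1, j) ∧ pvEnc N (i + 1, j) < N * N := pvEnc_bounds hcellD
      have heD : pvEnc N (i + 1, j) = (i + 1) * N + j := by unfold pvEnc; ring
      have hDb : 0 ≤ (i + 1) * N + j ∧ (i + 1) * N + j < N * N := heD ▸ hDb'
      have hconnD : pvConn graph N w (pvDec N (i * N + j)) (pvDec N ((i + 1) * N + j)) := by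
        have hdecD : pvDec N ((i + 1) * N + j) = (i + 1, j) := by
          rw [← heD]
          exact pvDec_enc hcellD
        rw [hdecc, hdecD]
        exact pvConn_single _ _ _ ⟨hcell, hcellD, hlij, hc2.2, Or.inr ⟨rfl, Or.inl rfl⟩⟩
      have hu2 := pvUnion_spec hu1.1 (a := i * N + j) (b := (i + 1) * N + j)
        (by omega) (by omega) (by omega) (by omega)
      have hci2 := pvCInv_union graph hN hu1.1 hci1 (by omega) (by omega) (by omega) (by omega) hconnD
      refine ⟨hu2.1, hci2, ?_⟩
      have hkeep : ∀ x y : Int, 0 ≤ x → x < N * N → 0 ≤ y → y < N * N →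
          pvFind p x = pvFind p y →
          pvFind (pvUnion (pvUnion p (i * N + j) (i * N + j + 1)) (i * N + j) ((i + 1) * N + j)) x
            = pvFind (pvUnion (pvUnion p (i * N + j) (i * N + j + 1)) (i * N + j) ((i + 1) * N + j)) y := by
        intro x y hx0 hx1 hy0 hy1 hxy
        exact hu2.2.2.2.1 x y hx0 (by omega) hy0 (by omega)
          (hu1.2.2.2.1 x y hx0 (by omega) hy0 (by omega) hxy)
      intro c hc hb hl
      by_cases hbij : pvBefore i j c
      · obtain ⟨f1, f2⟩ := hed c hc hbij hl
        obtain ⟨c1, c2, c3, c4⟩ := hc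
        constructor
        · intro hx hy
          have hnb := pvEnc_bounds (⟨c1, c2, by omega, hx⟩ : pvInR N (c.1, c.2 + 1))
          have hcbb := pvEnc_bounds (⟨c1, c2, c3, c4⟩ : pvInR N c)
          exact hkeep _ _ hcbb.1 hcbb.2 hnb.1 hnb.2 (f1 hx hy)
        · intro hx hy
          have hnb := pvEnc_bounds (⟨by omega, hx, c3, c4⟩ : pvInR N (c.1 + 1, c.2))
          have hcbb := pvEnc_bounds (⟨c1, c2, c3, c4⟩ : pvInR N c)
          exact hkeep _ _ hcbb.1 hcbb.2 hnb.1 hnb.2 (f2 hx hy)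
      · have hcij := hnewcell c hc hb hbij
        subst hcij
        constructor
        · intro _ _
          show pvFind _ (i * N + j) = pvFind _ (pvEnc N (i, j + 1))
          rw [heR]
          exact hu2.2.2.2.1 _ _ (by omega) (by omega) (by omega) (by omega) hu1.2.2.1
        · intro _ _
          show pvFind _ (i * N + j) = pvFind _ (pvEnc N (i + 1, j))
          rw [heD]
          exact hu2.2.2.1
    -- case hc1 true, hc2 false
    · rw [if_neg hc2, if_pos hc1]
      have hcellR : pvInR N (i, j + 1) := ⟨hi0, hi1, by omega, hc1.1⟩
      have hRb' : 0 ≤ pvEnc N (i, j + 1) ∧ pvEnc N (i, j + 1) < N * N := pvEnc_bounds hcellR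
      have heR : pvEnc N (i, j + 1) = i * N + j + 1 := by unfold pvEnc; ring
      have hRb : 0 ≤ i * N + j + 1 ∧ i * N + j + 1 < N * N := heR ▸ hRb'
      have hconnR : pvConn graph N w (pvDec N (i * N + j)) (pvDec N (i * N + j + 1)) := by
        have hdecR : pvDec N (i * N + j + 1) = (i, j + 1) := by
          rw [← heR]
          exact pvDec_enc hcellR
        rw [hdecc, hdecR]
        exact pvConn_single _ _ _ ⟨hcell, hcellR, hlij, hc1.2, Or.inl ⟨rfl, Or.inl rfl⟩⟩
      have hu1 := pvUnion_spec hwf (a := i * N + j) (b := i * N + j + 1)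
        (by omega) (by omega) (by omega) (by omega)
      have hci1 := pvCInv_union graph hN hwf hci (by omega) (by omega) (by omega) (by omega) hconnR
      have hlen1 := hu1.2.1
      refine ⟨hu1.1, hci1, ?_⟩
      intro c hc hb hl
      by_cases hbij : pvBefore i j c
      · obtain ⟨f1, f2⟩ := hed c hc hbij hl
        obtain ⟨c1, c2, c3, c4⟩ := hc
        constructor
        · intro hx hy
          have hnb := pvEnc_bounds (⟨c1, c2, by omega, hx⟩ : pvInR N (c.1, c.2 + 1))
          have hcbb := pvEnc_bounds (⟨c1, c2, c3, c4⟩ : pvInR N c)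
          exact hu1.2.2.2.1 _ _ hcbb.1 (by omega) hnb.1 (by omega) (f1 hx hy)
        · intro hx hy
          have hnb := pvEnc_bounds (⟨by omega, hx, c3, c4⟩ : pvInR N (c.1 + 1, c.2))
          have hcbb := pvEnc_bounds (⟨c1, c2, c3, c4⟩ : pvInR N c)
          exact hu1.2.2.2.1 _ _ hcbb.1 (by omega) hnb.1 (by omega) (f2 hx hy)
      · have hcij := hnewcell c hc hb hbij
        subst hcij
        constructor
        · intro _ _
          show pvFind _ (i * N + j) = pvFind _ (pvEnc N (i, j + 1))
          rw [heR]
          exact hu1.2.2.1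
        · intro hx hy
          exact absurd ⟨hx, hy⟩ hc2
    -- case hc1 false, hc2 true
    · rw [if_pos hc2, if_neg hc1]
      have hcellD : pvInR N (i + 1, j) := ⟨by omega, hc2.1, hj0, hj1⟩
      have hDb' : 0 ≤ pvEnc N (i + 1, j) ∧ pvEnc N (i + 1, j) < N * N := pvEnc_bounds hcellD
      have heD : pvEnc N (i + 1, j) = (i + 1) * N + j := by unfold pvEnc; ring
      have hDb : 0 ≤ (i + 1) * N + j ∧ (i + 1) * N + j < N * N := heD ▸ hDb'
      have hconnD : pvConn graph N w (pvDec N (i * N + j)) (pvDec N ((i + 1) * N + j)) := by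
        have hdecD : pvDec N ((i + 1) * N + j) = (i + 1, j) := by
          rw [← heD]
          exact pvDec_enc hcellD
        rw [hdecc, hdecD]
        exact pvConn_single _ _ _ ⟨hcell, hcellD, hlij, hc2.2, Or.inr ⟨rfl, Or.inl rfl⟩⟩
      have hu2 := pvUnion_spec hwf (a := i * N + j) (b := (i + 1) * N + j)
        (by omega) (by omega) (by omega) (by omega)
      have hci2 := pvCInv_union graph hN hwf hci (by omega) (by omega) (by omega) (by omega) hconnD
      refine ⟨hu2.1, hci2, ?_⟩
      intro c hc hb hl
      by_cases hbij : pvBefore i j c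
      · obtain ⟨f1, f2⟩ := hed c hc hbij hl
        obtain ⟨c1, c2, c3, c4⟩ := hc
        constructor
        · intro hx hy
          have hnb := pvEnc_bounds (⟨c1, c2, by omega, hx⟩ : pvInR N (c.1, c.2 + 1))
          have hcbb := pvEnc_bounds (⟨c1, c2, c3, c4⟩ : pvInR N c)
          exact hu2.2.2.2.1 _ _ hcbb.1 (by omega) hnb.1 (by omega) (f1 hx hy)
        · intro hx hy
          have hnb := pvEnc_bounds (⟨by omega, hx, c3, c4⟩ : pvInR N (c.1 + 1, c.2))
          have hcbb := pvEnc_bounds (⟨c1, c2, c3, c4⟩ : pvInR N c)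
          exact hu2.2.2.2.1 _ _ hcbb.1 (by omega) hnb.1 (by omega) (f2 hx hy)
      · have hcij := hnewcell c hc hb hbij
        subst hcij
        constructor
        · intro hx hy
          exact absurd ⟨hx, hy⟩ hc1
        · intro _ _
          show pvFind _ (i * N + j) = pvFind _ (pvEnc N (i + 1, j))
          rw [heD]
          exact hu2.2.2.1
    -- case hc1 false, hc2 false
    · rw [if_neg hc2, if_neg hc1]
      refine ⟨hwf, hci, ?_⟩
      intro c hc hb hl
      by_cases hbij : pvBefore i j c
      · exact hed c hc hbij hl
      · have hcij := hnewcell c hc hb hbij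
        subst hcij
        constructor
        · intro hx hy
          exact absurd ⟨hx, hy⟩ hc1
        · intro hx hy
          exact absurd ⟨hx, hy⟩ hc2

-- B's accumulated parent list
def pvParentFinal (graph : List (List Int)) (N waterLevel : Int) : List Int :=
  (PySem.List.pyRange 0 N 1).foldl (fun p i =>
    (PySem.List.pyRange 0 N 1).foldl (fun p j =>
      if pvGet2 graph i j ≤ waterLevel then p
      else
        let p1 := if j + 1 < N ∧ waterLevel < pvGet2 graph i (j + 1) then
            pvUnion p (i * N + j) (i * N + j + 1) else p
        if i + 1 < N ∧ waterLevel < pvGet2 graph (i + 1) j then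
          pvUnion p1 (i * N + j) ((i + 1) * N + j) else p1) p) (PySem.List.pyRange 0 (N * N) 1)

-- one row of B's scan
def pvBRow (graph : List (List Int)) (N w : Int) (p : List Int) (i : Int) : List Int :=
  (PySem.List.pyRange 0 N 1).foldl (fun p j =>
      if pvGet2 graph i j ≤ w then p
      else
        let p1 := if j + 1 < N ∧ w < pvGet2 graph i (j + 1) then
            pvUnion p (i * N + j) (i * N + j + 1) else p
        if i + 1 < N ∧ w < pvGet2 graph (i + 1) j then
          pvUnion p1 (i * N + j) ((i + 1) * N + j) else p1) p

lemma pvEdges_rowend {graph : List (List Int)} {N w i : Int} {p : List Int}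
    (h : pvEdges graph N w p i N) : pvEdges graph N w p (i + 1) 0 := by
  intro c hc hb hl
  refine h c hc ?_ hl
  obtain ⟨c1, c2, c3, c4⟩ := hc
  unfold pvBefore at hb ⊢
  rcases hb with hh | ⟨h1, h2⟩
  · by_cases hci : c.1 < i
    · exact Or.inl hci
    · exact Or.inr ⟨by omega, c4⟩
  · exact absurd h2 (by omega)

lemma pvParentFinal_inv (graph : List (List Int)) {N : Int} (w : Int) (hN : 0 < N) :
    pvWf N (pvParentFinal graph N w) ∧ pvCInv graph N w (pvParentFinal graph N w) ∧
      pvEdges graph N w (pvParentFinal graph N w) N 0 := by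
  have hNcast : ((N.toNat : Int)) = N := Int.toNat_of_nonneg (by omega)
  have hNNpos : (0 : Int) ≤ N * N := by positivity
  have hlen0 : (PySem.List.pyRange 0 (N * N) 1).length = (N * N).toNat := by
    rw [PySem.List.length_pyRange_one]
    have : N * N - 0 = N * N := by ring
    rw [this]
  have hget0 : ∀ k : Nat, k < (PySem.List.pyRange 0 (N * N) 1).length →
      (PySem.List.pyRange 0 (N * N) 1).getD k 0 = (k : Int) := by
    intro k hk
    rw [List.getD_eq_getElem?_getD, List.getElem?_eq_getElem hk,
        PySem.List.getElem_pyRange_one]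
    simp
  have hwf0 : pvWf N (PySem.List.pyRange 0 (N * N) 1) := by
    refine ⟨hlen0, ?_⟩
    intro k hk
    rw [hget0 k hk]
    omega
  have hci0 : pvCInv graph N w (PySem.List.pyRange 0 (N * N) 1) := by
    intro x hx0 hx1
    left
    have hxlt : x < ((PySem.List.pyRange 0 (N * N) 1).length : Int) := by omega
    rw [pvFind_rec hwf0 hx0 hxlt, hget0 x.toNat (by omega), if_pos (by omega : ((x.toNat : Int)) = x)]
  have hed0 : pvEdges graph N w (PySem.List.pyRange 0 (N * N) 1) 0 0 := by
    intro c hc hb hl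
    exfalso
    obtain ⟨c1, c2, c3, c4⟩ := hc
    rcases hb with h | ⟨h1, h2⟩ <;> omega
  have hrow : ∀ (i : Int) (st : List Int), 0 ≤ i → i < N →
      (pvWf N st ∧ pvCInv graph N w st ∧ pvEdges graph N w st i 0) →
      (pvWf N (pvBRow graph N w st i) ∧ pvCInv graph N w (pvBRow graph N w st i) ∧
        pvEdges graph N w (pvBRow graph N w st i) (i + 1) 0) := by
    intro i st hi0 hi1 hP
    have histep : ∀ (j : Int) (p : List Int), 0 ≤ j → j < N →
        (pvWf N p ∧ pvCInv graph N w p ∧ pvEdges graph N w p i j) →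
        (pvWf N (pvBBody graph N w p i j) ∧ pvCInv graph N w (pvBBody graph N w p i j) ∧
          pvEdges graph N w (pvBBody graph N w p i j) i (j + 1)) := by
      intro j p hj0 hj1 hPj
      exact pvB_cell graph hN hi0 hi1 hj0 hj1 hPj.1 hPj.2.1 hPj.2.2
    have hinner := pvFoldl_prefix (fun p j => pvBBody graph N w p i j) N
      (fun j p => pvWf N p ∧ pvCInv graph N w p ∧ pvEdges graph N w p i j)
      histep N.toNat st (by omega) hP
    rw [hNcast] at hinner
    have hrow_eq : pvBRow graph N w st i
        = (PySem.List.pyRange 0 N 1).foldl (fun p j => pvBBody graph N w p i j) st := rfl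
    rw [hrow_eq]
    exact ⟨hinner.1, hinner.2.1, pvEdges_rowend hinner.2.2⟩
  have houter := pvFoldl_prefix (pvBRow graph N w) N
    (fun i p => pvWf N p ∧ pvCInv graph N w p ∧ pvEdges graph N w p i 0)
    hrow N.toNat (PySem.List.pyRange 0 (N * N) 1) (by omega) ⟨hwf0, hci0, hed0⟩
  rw [hNcast] at houter
  have hpf : pvParentFinal graph N w
      = (PySem.List.pyRange 0 N 1).foldl (pvBRow graph N w) (PySem.List.pyRange 0 (N * N) 1) := rfl
  rw [hpf]
  exact houter

lemma pvFind_conn (graph : List (List Int)) {N w : Int} (hN : 0 < N)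
    {c d : Int × Int} (h : pvConn graph N w c d) :
    pvFind (pvParentFinal graph N w) (pvEnc N c) = pvFind (pvParentFinal graph N w) (pvEnc N d) := by
  obtain ⟨hwfF, hciF, hedF⟩ := pvParentFinal_inv graph w hN
  have hstep : ∀ a b : Int × Int, pvStep graph N w a b →
      pvFind (pvParentFinal graph N w) (pvEnc N a) = pvFind (pvParentFinal graph N w) (pvEnc N b) := by
    intro a b hs
    obtain ⟨ha, hb, hla, hlb, hadj⟩ := hs
    rcases hadj with ⟨h1, h2 | h2⟩ | ⟨h1, h2 | h2⟩
    · have hpair : (a.1, a.2 + 1) = b := Prod.ext h1 h2.symm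
      have hcl := (hedF a ha (Or.inl ha.2.1) hla).1
        (by obtain ⟨b1, b2, b3, b4⟩ := hb; omega) (by rw [hpair]; exact hlb)
      rw [hpair] at hcl
      exact hcl
    · have hpair : (b.1, b.2 + 1) = a := Prod.ext h1.symm h2.symm
      have hcl := (hedF b hb (Or.inl hb.2.1) hlb).1
        (by obtain ⟨a1, a2, a3, a4⟩ := ha; omega) (by rw [hpair]; exact hla)
      rw [hpair] at hcl
      exact hcl.symm
    · have hpair : (a.1 + 1, a.2) = b := Prod.ext h2.symm h1
      have hcl := (hedF a ha (Or.inl ha.2.1) hla).2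
        (by obtain ⟨b1, b2, b3, b4⟩ := hb; omega) (by rw [hpair]; exact hlb)
      rw [hpair] at hcl
      exact hcl
    · have hpair : (b.1 + 1, b.2) = a := Prod.ext h2.symm h1.symm
      have hcl := (hedF b hb (Or.inl hb.2.1) hlb).2
        (by obtain ⟨a1, a2, a3, a4⟩ := ha; omega) (by rw [hpair]; exact hla)
      rw [hpair] at hcl
      exact hcl.symm
  induction h with
  | refl => rfl
  | tail hab hbc ih => exact ih.trans (hstep _ _ hbc)

-- the pointwise bridge: a cell is its own root iff no scan-earlier land cell is connected to it
lemma pvRoot_iff_new (graph : List (List Int)) {N w : Int} (hN : 0 < N)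
    {c : Int × Int} (hc : pvInR N c) (hl : pvLand graph w c) :
    (pvFind (pvParentFinal graph N w) (pvEnc N c) = pvEnc N c ↔
      ¬ ∃ a, pvInR N a ∧ pvBefore c.1 c.2 a ∧ pvLand graph w a ∧ pvConn graph N w a c) := by
  obtain ⟨hwfF, hciF, hedF⟩ := pvParentFinal_inv graph w hN
  have hplen : (((pvParentFinal graph N w).length : Int)) = N * N := by
    have h1 := hwfF.1
    have h2 : (0 : Int) ≤ N * N := by positivity
    omega
  have hcb := pvEnc_bounds hc
  constructor
  · intro hroot
    rintro ⟨a, haR, hab, hal, hconn⟩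
    have hfe := pvFind_conn graph hN hconn
    have hab' := pvEnc_bounds haR
    have hfa := pvFind_props hwfF hab'.1 (by omega)
    have hlt : pvEnc N a < pvEnc N c := (pvBefore_iff_enc haR hc).mp hab
    rw [hroot] at hfe
    omega
  · intro hnew
    by_contra hne
    have hfp := pvFind_props hwfF hcb.1 (by omega)
    rcases hciF (pvEnc N c) hcb.1 hcb.2 with h | hcn
    · exact hne h
    · have hrb : 0 ≤ pvFind (pvParentFinal graph N w) (pvEnc N c) := hfp.1
      have hrlt : pvFind (pvParentFinal graph N w) (pvEnc N c) < pvEnc N c :=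
        lt_of_le_of_ne hfp.2.1 hne
      set r := pvFind (pvParentFinal graph N w) (pvEnc N c) with hr
      have hed := pvEnc_dec hN hrb (by omega : r < N * N)
      rw [pvDec_enc hc] at hcn
      have hdr : pvDec N r ≠ c := by
        intro he
        have : pvEnc N (pvDec N r) = pvEnc N c := by rw [he]
        omega
      have hprops := pvConn_props graph N w hcn hdr
      refine hnew ⟨pvDec N r, hed.2, ?_, hprops.1.2, hcn⟩
      exact (pvBefore_iff_enc hed.2 hc).mpr (by omega)

-- ---------- counting ----------

def pvCntRow (graph : List (List Int)) (N w : Int) (p : List Int) (i jm : Int) : Int :=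
  (PySem.List.pyRange 0 jm 1).foldl
    (fun total j => if w < pvGet2 graph i j ∧ pvFind p (i * N + j) = i * N + j then
      total + 1 else total) 0

def pvCntAll (graph : List (List Int)) (N w : Int) (p : List Int) (im : Int) : Int :=
  (PySem.List.pyRange 0 im 1).foldl (fun t i => t + pvCntRow graph N w p i N) 0

lemma pvAlt_eq_cnt (graph : List (List Int)) (N w : Int) (hN : 0 < N) :
    getIslandCnt_alt graph N w = pvCntAll graph N w (pvParentFinal graph N w) N := by
  unfold getIslandCnt_alt
  rw [if_neg (by omega : ¬ N ≤ 0)]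
  show (PySem.List.pyRange 0 N 1).foldl (fun total i =>
      (PySem.List.pyRange 0 N 1).foldl (fun total j =>
        if w < pvGet2 graph i j ∧ pvFind (pvParentFinal graph N w) (i * N + j) = i * N + j then
          total + 1 else total) total) 0
    = pvCntAll graph N w (pvParentFinal graph N w) N
  have hgen : ∀ (l : List Int) (t : Int),
      l.foldl (fun total i =>
        (PySem.List.pyRange 0 N 1).foldl (fun total j =>
          if w < pvGet2 graph i j ∧ pvFind (pvParentFinal graph N w) (i * N + j) = i * N + j then
            total + 1 else total) total) t
      = l.foldl (fun t i => t + pvCntRow graph N w (pvParentFinal graph N w) i N) t := by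
    intro l
    induction l with
    | nil => intro t; rfl
    | cons x xs ih =>
      intro t
      simp only [List.foldl_cons]
      rw [pvFoldl_ite_add (fun j =>
        w < pvGet2 graph x j ∧ pvFind (pvParentFinal graph N w) (x * N + j) = x * N + j) _ t]
      rw [ih]
      rfl
  rw [hgen]
  rfl

-- ---------- A-side: BFS characterization ----------

lemma pvDirs_step (graph : List (List Int)) (N w ci cj : Int)
    (vv : List (List Bool)) (qq : List (Int × Int)) (idx : Int) {ni nj : Int}
    (hni : ci + (PySem.List.pyGet? pvDI idx).getD 0 = ni)
    (hnj : cj + (PySem.List.pyGet? pvDJ idx).getD 0 = nj) :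
    pvDirs graph N w ci cj (vv, qq) idx =
      (if ¬ (0 ≤ ni ∧ ni < N ∧ 0 ≤ nj ∧ nj < N) then (vv, qq)
       else if pvVGet vv ni nj then (vv, qq)
       else if pvGet2 graph ni nj ≤ w then (vv, qq)
       else (pvVSet vv ni nj, qq ++ [(ni, nj)])) := by
  simp only [pvDirs]
  rw [hni, hnj]

lemma pvStep_cases (graph : List (List Int)) (N w : Int) {a d : Int × Int}
    (h : pvStep graph N w a d) :
    d = (a.1, a.2 + 1) ∨ d = (a.1, a.2 - 1) ∨ d = (a.1 + 1, a.2) ∨ d = (a.1 - 1, a.2) := by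
  obtain ⟨_, _, _, _, hadj⟩ := h
  rcases hadj with ⟨h1, h2 | h2⟩ | ⟨h1, h2 | h2⟩
  · exact Or.inl (Prod.ext h1.symm (by omega))
  · exact Or.inr (Or.inl (Prod.ext h1.symm (by omega)))
  · exact Or.inr (Or.inr (Or.inl (Prod.ext (by omega) h1.symm)))
  · exact Or.inr (Or.inr (Or.inr (Prod.ext (by omega) h1.symm)))

lemma pvDirs_acc (graph : List (List Int)) (N w : Int) {a : Int × Int} {v : List (List Bool)}
    (q : List (Int × Int)) {vk : List (List Bool)} {new : List (Int × Int)} (idx : Int)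
    {ni nj : Int}
    (hni : a.1 + (PySem.List.pyGet? pvDI idx).getD 0 = ni)
    (hnj : a.2 + (PySem.List.pyGet? pvDJ idx).getD 0 = nj)
    (hmk : pvInR N (ni, nj) → pvLand graph w (ni, nj) → pvStep graph N w a (ni, nj))
    (hnbn : ((ni, nj) : Int × Int) ∉ new)
    (hshk : pvShape N vk)
    (hch : ∀ x, pvInR N x → (pvVS vk x ↔ pvVS v x ∨ x ∈ new))
    (hnew : ∀ x ∈ new, pvStep graph N w a x ∧ ¬ pvVS v x)
    (hmu : pvMu vk + new.length = pvMu v) :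
    ∃ (vk' : List (List Bool)) (new' : List (Int × Int)),
      pvDirs graph N w a.1 a.2 (vk, q ++ new) idx = (vk', q ++ new') ∧
      (new' = new ∨ new' = new ++ [((ni, nj) : Int × Int)]) ∧
      pvShape N vk' ∧
      (∀ x, pvInR N x → (pvVS vk' x ↔ pvVS v x ∨ x ∈ new')) ∧
      (∀ x ∈ new', pvStep graph N w a x ∧ ¬ pvVS v x) ∧
      (pvMu vk' + new'.length = pvMu v) ∧
      (pvStep graph N w a (ni, nj) → pvVS vk' (ni, nj)) := by
  rw [pvDirs_step graph N w a.1 a.2 vk (q ++ new) idx hni hnj]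
  by_cases hin : 0 ≤ ni ∧ ni < N ∧ 0 ≤ nj ∧ nj < N
  · rw [if_neg (not_not_intro hin)]
    have hinR : pvInR N ((ni, nj) : Int × Int) := hin
    by_cases hv : pvVGet vk ni nj = true
    · rw [if_pos hv]
      exact ⟨vk, new, rfl, Or.inl rfl, hshk, hch, hnew, hmu, fun _ => hv⟩
    · rw [if_neg hv]
      by_cases hw0 : pvGet2 graph ni nj ≤ w
      · rw [if_pos hw0]
        refine ⟨vk, new, rfl, Or.inl rfl, hshk, hch, hnew, hmu, ?_⟩
        intro hs
        exact absurd hs.2.2.2.1 (not_lt.mpr hw0)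
      · rw [if_neg hw0]
        have hland : pvLand graph w ((ni, nj) : Int × Int) := by
          show w < pvGet2 graph ni nj
          omega
        have hstep := hmk hinR hland
        have hnvk : ¬ pvVS vk ((ni, nj) : Int × Int) := hv
        have hnv : ¬ pvVS v ((ni, nj) : Int × Int) := by
          intro hcon
          exact hnvk ((hch _ hinR).mpr (Or.inl hcon))
        refine ⟨pvVSet vk ni nj, new ++ [(ni, nj)], ?_, Or.inr rfl, ?_, ?_, ?_, ?_, ?_⟩
        · rw [List.append_assoc]
        · exact pvShape_vset N vk ni nj hshk
        · intro x hx
          by_cases hxe : x = ((ni, nj) : Int × Int)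
          · subst hxe
            simp only [List.mem_append, List.mem_singleton]
            constructor
            · intro _
              simp
            · intro _
              exact pvVS_vset_self hshk hinR
          · have hother := pvVS_vset_other (v := vk) (c := ((ni, nj) : Int × Int)) (x := x)
              hin.1 hin.2.2.1 hx.1 hx.2.2.1 hxe
            rw [hother, hch x hx]
            simp only [List.mem_append, List.mem_singleton]
            constructor
            · rintro (h | h)
              · exact Or.inl h
              · exact Or.inr (Or.inl h)
            · rintro (h | h | h)
              · exact Or.inl h
              · exact Or.inr h
              · exact absurd h hxe
        · intro x hx
          rcases List.mem_append.mp hx with h | h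
          · exact hnew x h
          · rw [List.mem_singleton] at h
            subst h
            exact ⟨hstep, hnv⟩
        · have hmm : pvMu (pvVSet vk ni nj) + 1 = pvMu vk := pvMu_vset hshk hinR hnvk
          simp only [List.length_append, List.length_singleton]
          omega
        · intro _
          exact pvVS_vset_self hshk hinR
  · rw [if_pos hin]
    refine ⟨vk, new, rfl, Or.inl rfl, hshk, hch, hnew, hmu, ?_⟩
    intro hs
    exact absurd hs.2.1 hin

lemma pvDirs_fold (graph : List (List Int)) (N w : Int) {a : Int × Int}
    (ha : pvInR N a) (hl : pvLand graph w a) (v : List (List Bool)) (q : List (Int × Int))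
    (hsh : pvShape N v) :
    ∃ new : List (Int × Int),
      ((PySem.List.pyRange 0 4 1).foldl (pvDirs graph N w a.1 a.2) (v, q)).2 = q ++ new ∧
      pvShape N ((PySem.List.pyRange 0 4 1).foldl (pvDirs graph N w a.1 a.2) (v, q)).1 ∧
      (∀ x, pvInR N x →
        (pvVS ((PySem.List.pyRange 0 4 1).foldl (pvDirs graph N w a.1 a.2) (v, q)).1 x ↔
          pvVS v x ∨ x ∈ new)) ∧
      (∀ x ∈ new, pvStep graph N w a x ∧ ¬ pvVS v x) ∧
      (∀ d, pvStep graph N w a d →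
        pvVS ((PySem.List.pyRange 0 4 1).foldl (pvDirs graph N w a.1 a.2) (v, q)).1 d) ∧
      pvMu ((PySem.List.pyRange 0 4 1).foldl (pvDirs graph N w a.1 a.2) (v, q)).1 + new.length
        = pvMu v := by
  have d0i : (PySem.List.pyGet? pvDI 0).getD 0 = 0 := by decide
  have d0j : (PySem.List.pyGet? pvDJ 0).getD 0 = 1 := by decide
  have d1i : (PySem.List.pyGet? pvDI 1).getD 0 = 0 := by decide
  have d1j : (PySem.List.pyGet? pvDJ 1).getD 0 = -1 := by decide
  have d2i : (PySem.List.pyGet? pvDI 2).getD 0 = 1 := by decide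
  have d2j : (PySem.List.pyGet? pvDJ 2).getD 0 = 0 := by decide
  have d3i : (PySem.List.pyGet? pvDI 3).getD 0 = -1 := by decide
  have d3j : (PySem.List.pyGet? pvDJ 3).getD 0 = 0 := by decide
  have hrange : PySem.List.pyRange 0 4 1 = [0, 1, 2, 3] := by decide
  have hmk0 : pvInR N ((a.1, a.2 + 1) : Int × Int) → pvLand graph w (a.1, a.2 + 1) →
      pvStep graph N w a (a.1, a.2 + 1) :=
    fun hin hlnb => ⟨ha, hin, hl, hlnb, Or.inl ⟨rfl, Or.inl rfl⟩⟩
  have hmk1 : pvInR N ((a.1, a.2 - 1) : Int × Int) → pvLand graph w (a.1, a.2 - 1) →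
      pvStep graph N w a (a.1, a.2 - 1) :=
    fun hin hlnb => ⟨ha, hin, hl, hlnb, Or.inl ⟨rfl, Or.inr (by omega)⟩⟩
  have hmk2 : pvInR N ((a.1 + 1, a.2) : Int × Int) → pvLand graph w (a.1 + 1, a.2) →
      pvStep graph N w a (a.1 + 1, a.2) :=
    fun hin hlnb => ⟨ha, hin, hl, hlnb, Or.inr ⟨rfl, Or.inl rfl⟩⟩
  have hmk3 : pvInR N ((a.1 - 1, a.2) : Int × Int) → pvLand graph w (a.1 - 1, a.2) →
      pvStep graph N w a (a.1 - 1, a.2) :=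
    fun hin hlnb => ⟨ha, hin, hl, hlnb, Or.inr ⟨rfl, Or.inr (by omega)⟩⟩
  obtain ⟨v1, new1, heq0, hg1, hsh1, hch1, hnew1, hmu1, hcov0⟩ :=
    pvDirs_acc graph N w (v := v) (vk := v) (new := []) q 0 (ni := a.1) (nj := a.2 + 1)
      (by rw [d0i]; ring) (by rw [d0j]) hmk0 (by simp)
      hsh (fun x hx => by simp) (fun x hx => by simp at hx) (by simp)
  have hb1 : ∀ x ∈ new1, x = ((a.1, a.2 + 1) : Int × Int) := by
    rcases hg1 with h | h <;> rw [h] <;> intro x hx <;> simp_all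
  obtain ⟨v2, new2, heq1, hg2, hsh2, hch2, hnew2, hmu2, hcov1⟩ :=
    pvDirs_acc graph N w (v := v) q 1 (ni := a.1) (nj := a.2 - 1)
      (by rw [d1i]; ring) (by rw [d1j]; ring) hmk1
      (by
        intro hmem
        have hh := hb1 _ hmem
        rw [Prod.mk.injEq] at hh
        omega)
      hsh1 hch1 hnew1 hmu1
  have hb2 : ∀ x ∈ new2, x = ((a.1, a.2 + 1) : Int × Int) ∨ x = ((a.1, a.2 - 1) : Int × Int) := by
    rcases hg2 with h | h <;> rw [h] <;> intro x hx
    · exact Or.inl (hb1 x hx)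
    · rcases List.mem_append.mp hx with hh | hh
      · exact Or.inl (hb1 x hh)
      · rw [List.mem_singleton] at hh
        exact Or.inr hh
  obtain ⟨v3, new3, heq2, hg3, hsh3, hch3, hnew3, hmu3, hcov2⟩ :=
    pvDirs_acc graph N w (v := v) q 2 (ni := a.1 + 1) (nj := a.2)
      (by rw [d2i]) (by rw [d2j]; ring) hmk2
      (by
        intro hmem
        rcases hb2 _ hmem with hh | hh <;> (rw [Prod.mk.injEq] at hh; omega))
      hsh2 hch2 hnew2 hmu2
  have hb3 : ∀ x ∈ new3, x = ((a.1, a.2 + 1) : Int × Int) ∨ x = ((a.1, a.2 - 1) : Int × Int)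
      ∨ x = ((a.1 + 1, a.2) : Int × Int) := by
    rcases hg3 with h | h <;> rw [h] <;> intro x hx
    · rcases hb2 x hx with hh | hh
      · exact Or.inl hh
      · exact Or.inr (Or.inl hh)
    · rcases List.mem_append.mp hx with hh | hh
      · rcases hb2 x hh with hh2 | hh2
        · exact Or.inl hh2
        · exact Or.inr (Or.inl hh2)
      · rw [List.mem_singleton] at hh
        exact Or.inr (Or.inr hh)
  obtain ⟨v4, new4, heq3, hg4, hsh4, hch4, hnew4, hmu4, hcov3⟩ :=
    pvDirs_acc graph N w (v := v) q 3 (ni := a.1 - 1) (nj := a.2)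
      (by rw [d3i]; ring) (by rw [d3j]; ring) hmk3
      (by
        intro hmem
        rcases hb3 _ hmem with hh | hh | hh <;> (rw [Prod.mk.injEq] at hh; omega))
      hsh3 hch3 hnew3 hmu3
  have hfold : (PySem.List.pyRange 0 4 1).foldl (pvDirs graph N w a.1 a.2) (v, q)
      = (v4, q ++ new4) := by
    rw [hrange]
    simp only [List.foldl_cons, List.foldl_nil]
    rw [show ((v, q) : List (List Bool) × List (Int × Int)) = (v, q ++ ([] : List (Int × Int)))
        from by rw [List.append_nil], heq0, heq1, heq2, heq3]
  have hsub12 : ∀ x, x ∈ new1 → x ∈ new2 := by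
    rcases hg2 with h | h <;> rw [h] <;> intro x hx <;> simp [hx]
  have hsub23 : ∀ x, x ∈ new2 → x ∈ new3 := by
    rcases hg3 with h | h <;> rw [h] <;> intro x hx <;> simp [hx]
  have hsub34 : ∀ x, x ∈ new3 → x ∈ new4 := by
    rcases hg4 with h | h <;> rw [h] <;> intro x hx <;> simp [hx]
  rw [hfold]
  refine ⟨new4, rfl, hsh4, hch4, hnew4, ?_, hmu4⟩
  intro d hs
  have hdin : pvInR N d := hs.2.1
  rcases pvStep_cases graph N w hs with h | h | h | h
  · have hv1 := hcov0 (h ▸ hs)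
    rcases (hch1 _ (h ▸ hdin)).mp hv1 with hh | hh
    · exact (hch4 d hdin).mpr (Or.inl (by rw [h]; exact hh))
    · exact (hch4 d hdin).mpr (Or.inr (by rw [h]; exact hsub34 _ (hsub23 _ (hsub12 _ hh))))
  · have hv2 := hcov1 (h ▸ hs)
    rcases (hch2 _ (h ▸ hdin)).mp hv2 with hh | hh
    · exact (hch4 d hdin).mpr (Or.inl (by rw [h]; exact hh))
    · exact (hch4 d hdin).mpr (Or.inr (by rw [h]; exact hsub34 _ (hsub23 _ hh)))
  · have hv3 := hcov2 (h ▸ hs)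
    rcases (hch3 _ (h ▸ hdin)).mp hv3 with hh | hh
    · exact (hch4 d hdin).mpr (Or.inl (by rw [h]; exact hh))
    · exact (hch4 d hdin).mpr (Or.inr (by rw [h]; exact hsub34 _ hh))
  · have hv4 := hcov3 (h ▸ hs)
    rw [← h] at hv4
    exact hv4

lemma pvBFS_char (graph : List (List Int)) (N w : Int) :
    ∀ (fuel : Nat) (v : List (List Bool)) (q : List (Int × Int)),
      pvShape N v →
      (∀ c ∈ q, pvInR N c ∧ pvLand graph w c ∧ pvVS v c) →
      (∀ c, pvInR N c → pvVS v c → c ∉ q → ∀ d, pvStep graph N w c d → pvVS v d) →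
      q.length + pvMu v ≤ fuel →
      pvShape N (pvBFS graph N w fuel v q) ∧
      (∀ x, pvInR N x →
        (pvVS (pvBFS graph N w fuel v q) x ↔ pvVS v x ∨ ∃ a ∈ q, pvConn graph N w a x)) := by
  intro fuel
  induction fuel with
  | zero =>
    intro v q hsh hq hcl hfuel
    have hq0 : q = [] := by
      cases q with
      | nil => rfl
      | cons c t =>
        exfalso
        simp only [List.length_cons] at hfuel
        omega
    subst hq0
    have hv : pvBFS graph N w 0 v [] = v := rfl
    rw [hv]
    refine ⟨hsh, ?_⟩
    intro x hx
    simp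
  | succ fuel ih =>
    intro v q hsh hq hcl hfuel
    cases q with
    | nil =>
      have hv : pvBFS graph N w (fuel + 1) v [] = v := rfl
      rw [hv]
      refine ⟨hsh, ?_⟩
      intro x hx
      simp
    | cons a t =>
      obtain ⟨ha, hla, hva⟩ := hq a (by simp)
      obtain ⟨new, hq2, hshF, hchF, hnewF, hcovF, hmuF⟩ := pvDirs_fold graph N w ha hla v t hsh
      have hunf : pvBFS graph N w (fuel + 1) v (a :: t)
          = pvBFS graph N w fuel
            ((PySem.List.pyRange 0 4 1).foldl (pvDirs graph N w a.1 a.2) (v, t)).1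
            ((PySem.List.pyRange 0 4 1).foldl (pvDirs graph N w a.1 a.2) (v, t)).2 := rfl
      rw [hunf, hq2]
      set s1 := ((PySem.List.pyRange 0 4 1).foldl (pvDirs graph N w a.1 a.2) (v, t)).1 with hs1
      have hq' : ∀ c ∈ t ++ new, pvInR N c ∧ pvLand graph w c ∧ pvVS s1 c := by
        intro c hcmem
        rcases List.mem_append.mp hcmem with hmem | hmem
        · obtain ⟨h1, h2, h3⟩ := hq c (List.mem_cons_of_mem _ hmem)
          exact ⟨h1, h2, (hchF c h1).mpr (Or.inl h3)⟩
        · obtain ⟨hst, hnv⟩ := hnewF c hmem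
          exact ⟨hst.2.1, hst.2.2.2.1, (hchF c hst.2.1).mpr (Or.inr hmem)⟩
      have hcl' : ∀ c, pvInR N c → pvVS s1 c → c ∉ t ++ new →
          ∀ d, pvStep graph N w c d → pvVS s1 d := by
        intro c hcin hvs hcnot d hstep
        have hnotnew : c ∉ new := fun hh => hcnot (List.mem_append.mpr (Or.inr hh))
        have hnott : c ∉ t := fun hh => hcnot (List.mem_append.mpr (Or.inl hh))
        have hvold : pvVS v c := by
          rcases (hchF c hcin).mp hvs with h | h
          · exact h
          · exact absurd h hnotnew
        by_cases hca : c = a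
        · subst hca
          exact hcovF d hstep
        · have hvd : pvVS v d := hcl c hcin hvold (by
            intro hmem
            rcases List.mem_cons.mp hmem with h | h
            · exact hca h
            · exact hnott h) d hstep
          exact (hchF d hstep.2.1).mpr (Or.inl hvd)
      have hfuel' : (t ++ new).length + pvMu s1 ≤ fuel := by
        have h1 : (a :: t).length + pvMu v ≤ fuel + 1 := hfuel
        simp only [List.length_cons, List.length_append] at h1 ⊢
        omega
      obtain ⟨hshR, hchR⟩ := ih s1 (t ++ new) hshF hq' hcl' hfuel'
      refine ⟨hshR, ?_⟩
      intro x hx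
      rw [hchR x hx]
      have hC : ∀ y, pvConn graph N w a y →
          (pvVS s1 y ∨ ∃ b ∈ t ++ new, pvConn graph N w b y) := by
        intro y hy
        induction hy with
        | refl => exact Or.inl ((hchF a ha).mpr (Or.inl hva))
        | tail hab hbc ihy =>
          rename_i m y'
          rcases ihy with hv1 | ⟨b, hb1, hb2⟩
          · have hmin : pvInR N m := hbc.1
            rcases (hchF m hmin).mp hv1 with hvm | hmnew
            · by_cases hma : m = a
              · subst hma
                exact Or.inl (hcovF _ hbc)
              · by_cases hmt : m ∈ t
                · exact Or.inr ⟨m, List.mem_append.mpr (Or.inl hmt), pvConn_single _ _ _ hbc⟩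
                · have hvy : pvVS v y' := hcl m hmin hvm (by
                    intro hmem
                    rcases List.mem_cons.mp hmem with h | h
                    · exact hma h
                    · exact hmt h) y' hbc
                  exact Or.inl ((hchF y' hbc.2.1).mpr (Or.inl hvy))
            · exact Or.inr ⟨m, List.mem_append.mpr (Or.inr hmnew), pvConn_single _ _ _ hbc⟩
          · exact Or.inr ⟨b, hb1, pvConn_trans _ _ _ hb2 (pvConn_single _ _ _ hbc)⟩
      constructor
      · rintro (hvs | ⟨b, hb1, hb2⟩)
        · rcases (hchF x hx).mp hvs with h | h
          · exact Or.inl h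
          · exact Or.inr ⟨a, by simp, pvConn_single _ _ _ (hnewF x h).1⟩
        · rcases List.mem_append.mp hb1 with h | h
          · exact Or.inr ⟨b, List.mem_cons_of_mem _ h, hb2⟩
          · exact Or.inr ⟨a, by simp,
              pvConn_trans _ _ _ (pvConn_single _ _ _ (hnewF b h).1) hb2⟩
      · rintro (hvx | ⟨b, hb1, hb2⟩)
        · exact Or.inl ((hchF x hx).mpr (Or.inl hvx))
        · rcases List.mem_cons.mp hb1 with h | h
          · subst h
            exact hC x hb2
          · exact Or.inr ⟨b, List.mem_append.mpr (Or.inl h), hb2⟩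

-- ---------- A-side: scan invariant ----------

def pvAInv (graph : List (List Int)) (N w : Int) (i j : Int)
    (st : List (List Bool) × Int) : Prop :=
  pvShape N st.1 ∧
  (∀ x, pvInR N x → (pvVS st.1 x ↔
    ∃ a, pvInR N a ∧ pvBefore i j a ∧ pvLand graph w a ∧ pvConn graph N w a x)) ∧
  st.2 = pvCntAll graph N w (pvParentFinal graph N w) i
         + pvCntRow graph N w (pvParentFinal graph N w) i j

-- the body of A's per-cell scan step, zeta-expanded (defeq to the lambda in the port)
def pvABody (graph : List (List Int)) (N w : Int) (st : List (List Bool) × Int) (i j : Int) :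
    List (List Bool) × Int :=
  if pvVGet st.1 i j then st
  else if pvGet2 graph i j ≤ w then st
  else (pvBFS graph N w (N.toNat * N.toNat + 1) (pvVSet st.1 i j) [(i, j)], st.2 + 1)

-- one row of A's scan
def pvARow (graph : List (List Int)) (N w : Int) (st : List (List Bool) × Int) (i : Int) :
    List (List Bool) × Int :=
  (PySem.List.pyRange 0 N 1).foldl (fun st j =>
    if pvVGet st.1 i j then st
    else if pvGet2 graph i j ≤ w then st
    else
      let v1 := pvVSet st.1 i j
      (pvBFS graph N w (N.toNat * N.toNat + 1) v1 [(i, j)], st.2 + 1)) st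

lemma pvBefore_mono {i j : Int} {a : Int × Int} (h : pvBefore i j a) : pvBefore i (j + 1) a := by
  rcases h with h | ⟨h1, h2⟩
  · exact Or.inl h
  · exact Or.inr ⟨h1, by omega⟩

lemma pvBefore_succ {i j : Int} (a : Int × Int) :
    pvBefore i (j + 1) a ↔ pvBefore i j a ∨ a = (i, j) := by
  constructor
  · rintro (h | ⟨h1, h2⟩)
    · exact Or.inl (Or.inl h)
    · by_cases hcj : a.2 < j
      · exact Or.inl (Or.inr ⟨h1, hcj⟩)
      · exact Or.inr (Prod.ext h1 (by omega))
  · rintro (h | rfl)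
    · exact pvBefore_mono h
    · exact Or.inr ⟨rfl, by omega⟩

lemma pvA_cell (graph : List (List Int)) {N w i j : Int} (hN : 0 < N)
    (hi0 : 0 ≤ i) (hi1 : i < N) (hj0 : 0 ≤ j) (hj1 : j < N)
    {st : List (List Bool) × Int} (hinv : pvAInv graph N w i j st) :
    pvAInv graph N w i (j + 1) (pvABody graph N w st i j) := by
  obtain ⟨hsh, hch, hcnt⟩ := hinv
  have hcell : pvInR N ((i, j) : Int × Int) := ⟨hi0, hi1, hj0, hj1⟩
  have hpred := hch ((i, j) : Int × Int) hcell
  have hrow : pvCntRow graph N w (pvParentFinal graph N w) i (j + 1)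
      = pvCntRow graph N w (pvParentFinal graph N w) i j +
        (if w < pvGet2 graph i j ∧
            pvFind (pvParentFinal graph N w) (i * N + j) = i * N + j then 1 else 0) := by
    unfold pvCntRow
    rw [PySem.List.pyRange_one_succ_right hj0, List.foldl_append]
    simp only [List.foldl_cons, List.foldl_nil]
    by_cases hp : w < pvGet2 graph i j ∧
        pvFind (pvParentFinal graph N w) (i * N + j) = i * N + j
    · rw [if_pos hp, if_pos hp]
    · rw [if_neg hp, if_neg hp]
      ring
  unfold pvABody
  by_cases hv : pvVGet st.1 i j = true
  · rw [if_pos hv]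
    have hvs : pvVS st.1 ((i, j) : Int × Int) := hv
    refine ⟨hsh, ?_, ?_⟩
    · intro x hx
      rw [hch x hx]
      constructor
      · rintro ⟨b, h1, h2, h3, h4⟩
        exact ⟨b, h1, pvBefore_mono h2, h3, h4⟩
      · rintro ⟨b, h1, h2, h3, h4⟩
        rcases (pvBefore_succ b).mp h2 with hb | rfl
        · exact ⟨b, h1, hb, h3, h4⟩
        · obtain ⟨b', k1, k2, k3, k4⟩ := hpred.mp hvs
          exact ⟨b', k1, k2, k3, pvConn_trans _ _ _ k4 h4⟩
    · have hnp : ¬ (w < pvGet2 graph i j ∧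
          pvFind (pvParentFinal graph N w) (i * N + j) = i * N + j) := by
        rintro ⟨hl, hroot⟩
        have hnew := (pvRoot_iff_new graph hN hcell hl).mp hroot
        exact hnew (hpred.mp hvs)
      rw [hrow, if_neg hnp]
      omega
  · rw [if_neg hv]
    have hnvs : ¬ pvVS st.1 ((i, j) : Int × Int) := hv
    by_cases hw0 : pvGet2 graph i j ≤ w
    · rw [if_pos hw0]
      refine ⟨hsh, ?_, ?_⟩
      · intro x hx
        rw [hch x hx]
        constructor
        · rintro ⟨b, h1, h2, h3, h4⟩
          exact ⟨b, h1, pvBefore_mono h2, h3, h4⟩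
        · rintro ⟨b, h1, h2, h3, h4⟩
          rcases (pvBefore_succ b).mp h2 with hb | rfl
          · exact ⟨b, h1, hb, h3, h4⟩
          · exact absurd h3 (not_lt.mpr hw0)
      · have hnp : ¬ (w < pvGet2 graph i j ∧
            pvFind (pvParentFinal graph N w) (i * N + j) = i * N + j) :=
          fun hp => absurd hp.1 (not_lt.mpr hw0)
        rw [hrow, if_neg hnp]
        omega
    · rw [if_neg hw0]
      have hland : pvLand graph w ((i, j) : Int × Int) := by
        show w < pvGet2 graph i j
        omega
      have hsh1 : pvShape N (pvVSet st.1 i j) := pvShape_vset N st.1 i j hsh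
      have hch1 : ∀ x, pvInR N x →
          (pvVS (pvVSet st.1 i j) x ↔ pvVS st.1 x ∨ x = ((i, j) : Int × Int)) := by
        intro x hx
        by_cases hxe : x = ((i, j) : Int × Int)
        · subst hxe
          constructor
          · intro _
            exact Or.inr rfl
          · intro _
            exact pvVS_vset_self hsh hcell
        · have hother : pvVS (pvVSet st.1 i j) x ↔ pvVS st.1 x :=
            pvVS_vset_other (v := st.1) (c := ((i, j) : Int × Int)) (x := x)
              hi0 hj0 hx.1 hx.2.2.1 hxe
          rw [hother]
          simp [hxe]
      have hmu1 : pvMu (pvVSet st.1 i j) + 1 = pvMu st.1 := pvMu_vset hsh hcell hnvs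
      have hbfs := pvBFS_char graph N w (N.toNat * N.toNat + 1) (pvVSet st.1 i j)
        [((i, j) : Int × Int)] hsh1
        (by
          intro c hc
          rw [List.mem_singleton] at hc
          subst hc
          exact ⟨hcell, hland, pvVS_vset_self hsh hcell⟩)
        (by
          intro c hcin hvs hcq d hstep
          have hcne : c ≠ ((i, j) : Int × Int) := by
            intro hh
            exact hcq (by rw [hh]; simp)
          have hvc : pvVS st.1 c := by
            rcases (hch1 c hcin).mp hvs with h | h
            · exact h
            · exact absurd h hcne
          obtain ⟨b, h1, h2, h3, h4⟩ := (hch c hcin).mp hvc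
          have hvd : pvVS st.1 d := (hch d hstep.2.1).mpr
            ⟨b, h1, h2, h3, pvConn_trans _ _ _ h4 (pvConn_single _ _ _ hstep)⟩
          exact (hch1 d hstep.2.1).mpr (Or.inl hvd))
        (by
          have hle := pvMu_le hsh
          simp only [List.length_singleton]
          omega)
      refine ⟨hbfs.1, ?_, ?_⟩
      · intro x hx
        rw [hbfs.2 x hx]
        constructor
        · rintro (hvx | ⟨b, hb1, hb2⟩)
          · rcases (hch1 x hx).mp hvx with h | hxe
            · obtain ⟨b, h1, h2, h3, h4⟩ := (hch x hx).mp h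
              exact ⟨b, h1, pvBefore_mono h2, h3, h4⟩
            · subst hxe
              exact ⟨(i, j), hcell, (pvBefore_succ _).mpr (Or.inr rfl), hland,
                pvConn_refl _ _ _ _⟩
          · rw [List.mem_singleton] at hb1
            subst hb1
            exact ⟨(i, j), hcell, (pvBefore_succ _).mpr (Or.inr rfl), hland, hb2⟩
        · rintro ⟨b, h1, h2, h3, h4⟩
          rcases (pvBefore_succ b).mp h2 with hb | rfl
          · exact Or.inl ((hch1 x hx).mpr (Or.inl ((hch x hx).mpr ⟨b, h1, hb, h3, h4⟩)))
          · exact Or.inr ⟨(i, j), by simp, h4⟩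
      · have hp : (w < pvGet2 graph i j ∧
            pvFind (pvParentFinal graph N w) (i * N + j) = i * N + j) := by
          refine ⟨by omega, ?_⟩
          show pvFind (pvParentFinal graph N w) (pvEnc N ((i, j) : Int × Int))
            = pvEnc N ((i, j) : Int × Int)
          apply (pvRoot_iff_new graph hN hcell hland).mpr
          intro hex
          exact hnvs (hpred.mpr hex)
        rw [hrow, if_pos hp]
        omega

lemma pvAInv_rowend {graph : List (List Int)} {N w i : Int} {st : List (List Bool) × Int}
    (hi0 : 0 ≤ i) (hinv : pvAInv graph N w i N st) : pvAInv graph N w (i + 1) 0 st := by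
  obtain ⟨hsh, hch, hcnt⟩ := hinv
  refine ⟨hsh, ?_, ?_⟩
  · intro x hx
    rw [hch x hx]
    constructor
    · rintro ⟨b, h1, h2, h3, h4⟩
      refine ⟨b, h1, ?_, h3, h4⟩
      rcases h2 with h | ⟨hh1, hh2⟩
      · exact Or.inl (by omega)
      · exact Or.inl (by omega)
    · rintro ⟨b, h1, h2, h3, h4⟩
      refine ⟨b, h1, ?_, h3, h4⟩
      obtain ⟨b1, b2, b3, b4⟩ := h1
      rcases h2 with h | ⟨hh1, hh2⟩
      · by_cases hbi : b.1 < i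
        · exact Or.inl hbi
        · exact Or.inr ⟨by omega, b4⟩
      · exact absurd hh2 (by omega)
  · have hr0 : pvCntRow graph N w (pvParentFinal graph N w) (i + 1) 0 = 0 := by
      unfold pvCntRow
      rw [PySem.List.pyRange_one_eq_nil (le_refl 0)]
      rfl
    have hall : pvCntAll graph N w (pvParentFinal graph N w) (i + 1)
        = pvCntAll graph N w (pvParentFinal graph N w) i
          + pvCntRow graph N w (pvParentFinal graph N w) i N := by
      unfold pvCntAll
      rw [PySem.List.pyRange_one_succ_right hi0, List.foldl_append]
      simp only [List.foldl_cons, List.foldl_nil]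
    rw [hall, hr0]
    omega

lemma pvAInv_init (graph : List (List Int)) (N w : Int) :
    pvAInv graph N w 0 0
      ((PySem.List.pyRange 0 N 1).map (fun _ => (PySem.List.pyRange 0 N 1).map (fun _ => false)),
        0) := by
  refine ⟨pvShape_init N, ?_, ?_⟩
  · intro x hx
    constructor
    · intro hvx
      exact absurd hvx (pvVS_init hx.1 hx.2.2.1)
    · rintro ⟨b, h1, h2, h3, h4⟩
      exfalso
      obtain ⟨b1, b2, b3, b4⟩ := h1
      rcases h2 with h | ⟨hh1, hh2⟩ <;> omega
  · have h1 : pvCntAll graph N w (pvParentFinal graph N w) 0 = 0 := by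
      unfold pvCntAll
      rw [PySem.List.pyRange_one_eq_nil (le_refl 0)]
      rfl
    have h2 : pvCntRow graph N w (pvParentFinal graph N w) 0 0 = 0 := by
      unfold pvCntRow
      rw [PySem.List.pyRange_one_eq_nil (le_refl 0)]
      rfl
    show (0 : Int) = _
    rw [h1, h2]
    ring

lemma pvA_eq_cnt (graph : List (List Int)) (N w : Int) (hN : 0 < N) :
    getIslandCnt graph N w = pvCntAll graph N w (pvParentFinal graph N w) N := by
  have hNcast : ((N.toNat : Int)) = N := Int.toNat_of_nonneg (by omega)
  have hrow : ∀ (i : Int) (st : List (List Bool) × Int), 0 ≤ i → i < N →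
      pvAInv graph N w i 0 st → pvAInv graph N w (i + 1) 0 (pvARow graph N w st i) := by
    intro i st hi0 hi1 hinv
    have histep : ∀ (j : Int) (st : List (List Bool) × Int), 0 ≤ j → j < N →
        pvAInv graph N w i j st → pvAInv graph N w i (j + 1) (pvABody graph N w st i j) :=
      fun j st hj0 hj1 h => pvA_cell graph hN hi0 hi1 hj0 hj1 h
    have hinner := pvFoldl_prefix (fun st j => pvABody graph N w st i j) N
      (fun j st => pvAInv graph N w i j st) histep N.toNat st (by omega) hinv
    rw [hNcast] at hinner
    have hrow_eq : pvARow graph N w st i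
        = (PySem.List.pyRange 0 N 1).foldl (fun st j => pvABody graph N w st i j) st := rfl
    rw [hrow_eq]
    exact pvAInv_rowend hi0 hinner
  have houter := pvFoldl_prefix (pvARow graph N w) N (fun i st => pvAInv graph N w i 0 st)
    hrow N.toNat
    ((PySem.List.pyRange 0 N 1).map (fun _ => (PySem.List.pyRange 0 N 1).map (fun _ => false)), 0)
    (by omega) (pvAInv_init graph N w)
  rw [hNcast] at houter
  obtain ⟨hshf, hchf, hcntf⟩ := houter
  have hr0 : pvCntRow graph N w (pvParentFinal graph N w) N 0 = 0 := by
    unfold pvCntRow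
    rw [PySem.List.pyRange_one_eq_nil (le_refl 0)]
    rfl
  show ((PySem.List.pyRange 0 N 1).foldl (pvARow graph N w)
      ((PySem.List.pyRange 0 N 1).map (fun _ => (PySem.List.pyRange 0 N 1).map (fun _ => false)),
        0)).2
    = pvCntAll graph N w (pvParentFinal graph N w) N
  rw [hcntf, hr0]
  ring

-- ===== VERDICT (by name: the statement is the Claim_ definition above) =====
theorem getIslandCnt_spec : Claim_equal_getIslandCnt := by
  unfold Claim_equal_getIslandCnt
  intro graph N w _ _
  unfold Spec_getIslandCnt
  by_cases hN : 0 < N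
  · rw [pvA_eq_cnt graph N w hN, pvAlt_eq_cnt graph N w hN]
  · push_neg at hN
    have hA : getIslandCnt graph N w = 0 := by
      unfold getIslandCnt
      rw [PySem.List.pyRange_one_eq_nil hN]
      simp
    have hB : getIslandCnt_alt graph N w = 0 := by
      unfold getIslandCnt_alt
      simp [hN]
    rw [hA, hB]
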